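-- pv_equiv track=rewrite | github.com/SamraAzizi/leetcode | advence/maxStability.py | canAchieve
-- ===== SOURCE A (Python) =====
-- def canAchieve(n, edges, k, target):
--     """
--     Check if we can build a spanning tree with stability >= target
--     """
--     # Union-Find data structure
--     parent = list(range(n))
--
--     def find(x):
--         # Path compression
--         while parent[x] != x:
--             parent[x] = parent[parent[x]]
--             x = parent[x]
--         return x
--
--     def union(x, y):
--         rx, ry = find(x), find(y)
--         if rx == ry:
--             return False
--         parent[ry] = rx
--         return True
--
--     # Separate edges
--     must_edges = []
--     optional_edges = []
--
--     for u, v, strength, must in edges: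
--         if must == 1:
--             must_edges.append((u, v, strength))
--         else:
--             optional_edges.append((u, v, strength))
--
--     # First, check if any must-include edge has strength < target
--     # (they cannot be upgraded)
--     for u, v, strength in must_edges:
--         if strength < target:
--             return False
--
--     # Include all must-include edges first
--     components = n
--     # Reset parent for must-include check
--     parent = list(range(n))
--
--     for u, v, _ in must_edges:
--         if not union(u, v):
--             return False  # Cycle detected in must-include edges
--         components -= 1
--
--     # Now we need to connect the remaining components
--     # Separate optional edges into those that meet target and those that need upgrade
--     good_edges = []  # strength >= target (no upgrade needed)
--     bad_edges = []   # strength < target (need upgrade)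
--
--     for u, v, strength in optional_edges:
--         if strength >= target:
--             good_edges.append((u, v))
--         else:
--             # Can this edge be upgraded to meet target?
--             if strength * 2 >= target:
--                 bad_edges.append((u, v))
--             # Otherwise, it's useless for this target
--
--     # Use good edges first (no upgrade cost)
--     upgrades_used = 0
--
--     for u, v in good_edges:
--         if components == 1:
--             break
--         if union(u, v):
--             components -= 1
--
--     # Then try bad edges (require upgrades)
--     for u, v in bad_edges:
--         if components == 1:
--             break
--         if upgrades_used >= k:
--             break
--         if union(u, v):
--             upgrades_used += 1
--             components -= 1
--
--     return components == 1
-- ===== SOURCE B (Python) =====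
-- def canAchieve(n, edges, k, target):
--     """
--     Check if we can build a spanning tree with stability >= target.
--
--     Different algorithm: no union-find at all.  One classification pass
--     (rejecting a weak mandatory edge immediately), then connected
--     components are counted by an explicit-stack DFS over adjacency
--     lists; the mandatory edges are checked for acyclicity by the forest
--     identity n - components == #edges, and the budget-bounded greedy
--     loop of the original becomes the closed test
--     c2 == 1 and (c1 == 1 or k >= c1 - 1).
--     """
--     must, good, bad = [], [], []
--     for u, v, strength, m in edges:
--         if m == 1:
--             if strength < target:
--                 return False
--             must.append((u, v))
--         elif strength >= target:
--             good.append((u, v))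
--         elif strength * 2 >= target:
--             bad.append((u, v))
--
--     def components(edge_list):
--         adj = [[] for _ in range(n)]
--         for u, v in edge_list:
--             adj[u].append(v)
--             adj[v].append(u)
--         seen = [False] * n
--         count = 0
--         for s in range(n):
--             if not seen[s]:
--                 count += 1
--                 seen[s] = True
--                 stack = [s]
--                 while stack:
--                     x = stack.pop()
--                     for y in adj[x]:
--                         if not seen[y]:
--                             seen[y] = True
--                             stack.append(y)
--         return count
--
--     c0 = components(must)
--     if n - c0 != len(must):
--         return False  # the mandatory edges contain a cycle
--     c1 = components(must + good)
--     c2 = components(must + good + bad)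
--     return c2 == 1 and (c1 == 1 or k >= c1 - 1)
-- ===== Notes on version B (the rewrite author's own statement) =====
-- stated objective: alternative
-- what changed: B contains no union-find at all: connected components are counted by an explicit-stack DFS over adjacency lists, the mandatory-edge cycle check becomes the forest identity n - components == #edges, one classification pass (with an immediate reject of a weak mandatory edge) replaces A's staged partition passes, and A's budget-bounded greedy upgrade loop becomes the closed test c2 == 1 and (c1 == 1 or k >= c1 - 1) on two component counts.
-- outside the precondition, e.g. on canAchieve(1, [(0, 0, 9, 0), (5, 5, 9, 0)], 0, 3): A returns True, B raises IndexError
import Mathlib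
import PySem

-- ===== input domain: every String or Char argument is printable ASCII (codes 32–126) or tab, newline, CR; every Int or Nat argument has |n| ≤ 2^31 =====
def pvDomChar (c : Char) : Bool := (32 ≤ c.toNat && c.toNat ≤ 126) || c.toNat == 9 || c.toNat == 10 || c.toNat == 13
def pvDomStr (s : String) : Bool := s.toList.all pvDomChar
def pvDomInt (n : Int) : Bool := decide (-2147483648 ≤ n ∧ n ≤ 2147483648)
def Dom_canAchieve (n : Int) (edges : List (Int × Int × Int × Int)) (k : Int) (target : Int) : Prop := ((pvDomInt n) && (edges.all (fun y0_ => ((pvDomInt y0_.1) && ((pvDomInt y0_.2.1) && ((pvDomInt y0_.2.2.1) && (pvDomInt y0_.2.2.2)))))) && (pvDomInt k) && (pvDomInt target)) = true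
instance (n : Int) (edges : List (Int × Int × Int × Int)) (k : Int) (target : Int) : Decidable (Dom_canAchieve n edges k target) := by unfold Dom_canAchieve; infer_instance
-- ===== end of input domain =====

-- B drops union-find entirely: it classifies edges in one pass, counts connected components by an
-- explicit-stack DFS over adjacency lists, checks the mandatory edges with the forest identity
-- n - components == #edges, and replaces A's budget-bounded greedy loop by the closed test
-- c2 == 1 && (c1 == 1 || k >= c1 - 1); same return value on Pre_, no speed claim.

-- ===== PORT A =====

-- parent[x] read / parent[x] = v (Python list indexing; total forms, exact on the in-range
-- indices every access stays in under Pre_)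
def pvAt (s : List Int) (x : Int) : Int := PySem.List.pyGetD s x 0

def pvSet (s : List Int) (x v : Int) : List Int := PySem.List.pySetD s x v

def findA : Nat → List Int → Int → List Int × Int
  | 0, s, x => (s, x)
  | fuel+1, s, x =>
    if pvAt s x ≠ x then
      let s' := pvSet s x (pvAt s (pvAt s x))
      findA fuel s' (pvAt s' x)
    else (s, x)

def unionA (s : List Int) (x y : Int) : List Int × Bool :=
  let (s1, rx) := findA s.length s x
  let (s2, ry) := findA s1.length s1 y
  if rx = ry then (s2, false) else (pvSet s2 ry rx, true)

def canAchieve (n : Int) (edges : List (Int × Int × Int × Int)) (k : Int) (target : Int) : Bool :=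
  let mo := edges.foldl (fun (acc : List (Int × Int × Int) × List (Int × Int × Int)) e =>
      if e.2.2.2 = 1 then (acc.1 ++ [(e.1, e.2.1, e.2.2.1)], acc.2)
      else (acc.1, acc.2 ++ [(e.1, e.2.1, e.2.2.1)])) ([], [])
  let must_edges := mo.1
  let optional_edges := mo.2
  if must_edges.any (fun e => e.2.2 < target) then false
  else
    let parent0 : List Int := PySem.List.pyRange 0 n 1
    let st1 := must_edges.foldl (fun (st : Option (List Int × Int)) e =>
        match st with
        | none => none
        | some (p, comp) =>
          let r := unionA p e.1 e.2.1
          if r.2 then some (r.1, comp - 1) else none) (some (parent0, n))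
    match st1 with
    | none => false
    | some (p1, comp1) =>
      let gb := optional_edges.foldl (fun (acc : List (Int × Int) × List (Int × Int)) e =>
          if e.2.2 ≥ target then (acc.1 ++ [(e.1, e.2.1)], acc.2)
          else if e.2.2 * 2 ≥ target then (acc.1, acc.2 ++ [(e.1, e.2.1)])
          else acc) ([], [])
      let st2 := gb.1.foldl (fun (st : List Int × Int) e =>
          if st.2 = 1 then st
          else
            let r := unionA st.1 e.1 e.2
            (r.1, if r.2 then st.2 - 1 else st.2)) (p1, comp1)
      let st3 := gb.2.foldl (fun (st : List Int × Int × Int) e =>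
          if st.2.1 = 1 then st
          else if st.2.2 ≥ k then st
          else
            let r := unionA st.1 e.1 e.2
            if r.2 then (r.1, st.2.1 - 1, st.2.2 + 1) else (r.1, st.2.1, st.2.2)) (st2.1, st2.2, 0)
      st3.2.1 == 1

-- ===== PORT B =====

-- number of False cells of `seen` (the measure DFS marking shrinks; used only for termination)
def pvFalses (s : List Bool) : Nat := s.countP (fun b => b == false)

theorem pvCountP_set_true_lt (s : List Bool) (j : Nat) (hj : j < s.length) (hv : s[j] = false) :
    (s.set j true).countP (fun b => b == false) < s.countP (fun b => b == false) := by
  induction s generalizing j with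
  | nil => simp at hj
  | cons a s ih =>
    cases j with
    | zero => simp_all
    | succ j =>
      simp only [List.length_cons] at hj
      simp only [List.getElem_cons_succ] at hv
      rw [List.set_cons_succ, List.countP_cons, List.countP_cons]
      have := ih j (by omega) hv
      omega

theorem pvIdx_lt (len : Nat) (x : Int) (j : Nat) (h : PySem.List.pyIdx? len x = some j) :
    j < len := by
  simp only [PySem.List.pyIdx?] at h
  split_ifs at h with h1 h2 h3 <;> simp_all <;> omega

theorem pvFalses_mark_lt (seen : List Bool) (y : Int)
    (h : PySem.List.pyGetD seen y true = false) :
    pvFalses (PySem.List.pySetD seen y true) < pvFalses seen := by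
  unfold pvFalses
  simp only [PySem.List.pyGetD, PySem.List.pyGet?, PySem.List.pySetD, PySem.List.pySet?] at *
  cases hidx : PySem.List.pyIdx? seen.length y with
  | none => rw [hidx] at h; simp at h
  | some j =>
    have hj := pvIdx_lt seen.length y j hidx
    rw [hidx] at h
    simp only [Option.bind_some, List.getElem?_eq_getElem hj, Option.getD_some,
      Option.map_some] at h ⊢
    exact pvCountP_set_true_lt seen j hj h

-- the inner `for y in adj[x]` body: mark-and-push an unseen neighbour
-- (reads default to True and writes out of range are inert: exactly the accesses Pre_ admits are in range)
def dfsNb (p : List Bool × List Int) (y : Int) : List Bool × List Int :=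
  if PySem.List.pyGetD p.1 y true = false then (PySem.List.pySetD p.1 y true, p.2 ++ [y]) else p

theorem pvFoldNb_falses_le (L : List Int) : ∀ (p : List Bool × List Int),
    pvFalses (L.foldl dfsNb p).1 ≤ pvFalses p.1 := by
  induction L with
  | nil => intro p; exact le_rfl
  | cons y L ih =>
    intro p
    rw [List.foldl_cons]
    refine le_trans (ih (dfsNb p y)) ?_
    unfold dfsNb
    split_ifs with h
    · exact le_of_lt (pvFalses_mark_lt p.1 y h)
    · exact le_rfl

theorem pvFoldNb_decr (L : List Int) : ∀ (seen : List Bool) (stk : List Int),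
    pvFalses (L.foldl dfsNb (seen, stk)).1 < pvFalses seen ∨
      L.foldl dfsNb (seen, stk) = (seen, stk) := by
  induction L with
  | nil => intro seen stk; exact Or.inr rfl
  | cons y L ih =>
    intro seen stk
    rw [List.foldl_cons]
    by_cases h : PySem.List.pyGetD seen y true = false
    · left
      have h1 : dfsNb (seen, stk) y = (PySem.List.pySetD seen y true, stk ++ [y]) := by
        simp [dfsNb, h]
      rw [h1]
      exact lt_of_le_of_lt (pvFoldNb_falses_le L _) (pvFalses_mark_lt seen y h)
    · have h1 : dfsNb (seen, stk) y = (seen, stk) := by simp [dfsNb, h]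
      rw [h1]
      exact ih seen stk

-- the `while stack:` loop of B's DFS
def dfsLoop (adj : List (List Int)) (seen : List Bool) (stack : List Int) : List Bool :=
  if h : stack = [] then seen
  else
    let x := stack.getLast h
    let st := (PySem.List.pyGetD adj x []).foldl dfsNb (seen, stack.dropLast)
    dfsLoop adj st.1 st.2
termination_by (pvFalses seen, stack.length)
decreasing_by
  rcases pvFoldNb_decr (PySem.List.pyGetD adj x []) seen stack.dropLast with hlt | heq
  · exact Prod.Lex.left _ _ hlt
  · rw [heq]
    apply Prod.Lex.right
    have hpos : 0 < stack.length := List.length_pos_iff.mpr h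
    simp [List.length_dropLast]
    omega

-- adj = [[] for _ in range(n)]; adj[u].append(v); adj[v].append(u)
def pvBuildAdj (n : Int) (es : List (Int × Int)) : List (List Int) :=
  es.foldl (fun adj e =>
    let adj1 := PySem.List.pySetD adj e.1 (PySem.List.pyGetD adj e.1 [] ++ [e.2])
    PySem.List.pySetD adj1 e.2 (PySem.List.pyGetD adj1 e.2 [] ++ [e.1]))
    ((PySem.List.pyRange 0 n 1).map (fun _ => ([] : List Int)))

def pvComponents (n : Int) (es : List (Int × Int)) : Int :=
  let adj := pvBuildAdj n es
  let st := (PySem.List.pyRange 0 n 1).foldl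
    (fun (p : Int × List Bool) s =>
      if PySem.List.pyGetD p.2 s true = false then
        (p.1 + 1, dfsLoop adj (PySem.List.pySetD p.2 s true) [s])
      else p)
    (0, List.replicate n.toNat false)
  st.1

-- the single classification pass (returns none on a weak mandatory edge = Python's early `return False`)
def pvClassify (target : Int) : List (Int × Int × Int × Int) →
    Option (List (Int × Int) × List (Int × Int) × List (Int × Int))
  | [] => some ([], [], [])
  | e :: es =>
    if e.2.2.2 = 1 then
      if e.2.2.1 < target then none
      else (pvClassify target es).map (fun t => ((e.1, e.2.1) :: t.1, t.2.1, t.2.2))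
    else if e.2.2.1 ≥ target then
      (pvClassify target es).map (fun t => (t.1, (e.1, e.2.1) :: t.2.1, t.2.2))
    else if e.2.2.1 * 2 ≥ target then
      (pvClassify target es).map (fun t => (t.1, t.2.1, (e.1, e.2.1) :: t.2.2))
    else pvClassify target es

def canAchieve_alt (n : Int) (edges : List (Int × Int × Int × Int)) (k : Int) (target : Int) : Bool :=
  match pvClassify target edges with
  | none => false
  | some (must, good, bad) =>
    let c0 := pvComponents n must
    if n - c0 ≠ (must.length : Int) then false
    else
      let c1 := pvComponents n (must ++ good)
      let c2 := pvComponents n (must ++ good ++ bad)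
      c2 == 1 && (c1 == 1 || k ≥ c1 - 1)

-- ===== PRECONDITION & SPEC =====
-- Pre_ admits every input with a below-target must-edge (both programs answer False before any
-- list access) and otherwise requires every endpoint to lie in Python's list-index range
-- [-n, n) for every edge the programs classify as usable (must-edges and optional edges with
-- strength >= target or strength*2 >= target; other edges are discarded unread; with no usable
-- edge at all the condition is vacuous and any n is admitted). It excludes only inputs whose
-- parent/adjacency indexing would go out of range — there A raises IndexError unless its early
-- breaks happen to skip the offending edge, and B raises IndexError.
def Pre_canAchieve (n : Int) (edges : List (Int × Int × Int × Int)) (k : Int) (target : Int) : Prop :=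
  (∃ e ∈ edges, e.2.2.2 = 1 ∧ e.2.2.1 < target) ∨
    ∀ e ∈ edges,
      (e.2.2.2 = 1 ∨ e.2.2.1 ≥ target ∨ e.2.2.1 * 2 ≥ target) →
      -n ≤ e.1 ∧ e.1 < n ∧ -n ≤ e.2.1 ∧ e.2.1 < n
instance (n : Int) (edges : List (Int × Int × Int × Int)) (k : Int) (target : Int) : Decidable (Pre_canAchieve n edges k target) := by unfold Pre_canAchieve; infer_instance

def pvWitness_canAchieve : Int × (List (Int × Int × Int × Int)) × Int × Int :=
  (4, [(0, 1, 5, 1), (1, 2, 2, 0), (2, 3, 4, 0)], 1, 4)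

def Spec_canAchieve (n : Int) (edges : List (Int × Int × Int × Int)) (k : Int) (target : Int) (out : Bool) : Prop := out = canAchieve_alt n edges k target
instance (n : Int) (edges : List (Int × Int × Int × Int)) (k : Int) (target : Int) (out : Bool) : Decidable (Spec_canAchieve n edges k target out) := by unfold Spec_canAchieve; infer_instance

-- ===== CLAIM (what is proved, stated in full; the proofs are below) =====
def Claim_equal_canAchieve : Prop := ∀ (n : Int) (edges : List (Int × Int × Int × Int)) (k : Int) (target : Int), Dom_canAchieve n edges k target → Pre_canAchieve n edges k target → Spec_canAchieve n edges k target (canAchieve n edges k target)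

-- ===== LEMMAS AND PROOFS =====

theorem pvLen_set (s : List Int) (x v : Int) : (pvSet s x v).length = s.length :=
  PySem.List.length_pySetD s x v

theorem pvAt_nonneg_eq (s : List Int) (x : Int) (h : 0 ≤ x) :
    pvAt s x = s.getD x.toNat 0 := PySem.List.pyGetD_of_nonneg s 0 h

theorem pvAt_set_self (s : List Int) (x v : Int) (h0 : 0 ≤ x) (h : x.toNat < s.length) :
    pvAt (pvSet s x v) x = v := by
  rw [pvSet, PySem.List.pySetD_of_nonneg s v h0, pvAt_nonneg_eq _ _ h0]
  simp [List.getD, h]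

theorem pvAt_set_ne (s : List Int) (x v z : Int) (h0 : 0 ≤ x) (h0z : 0 ≤ z) (hne : z ≠ x) :
    pvAt (pvSet s x v) z = pvAt s z := by
  rw [pvSet, PySem.List.pySetD_of_nonneg s v h0, pvAt_nonneg_eq _ _ h0z, pvAt_nonneg_eq _ _ h0z]
  simp [List.getD]
  rw [List.getElem?_set_ne (by omega)]

theorem pyIdx_wrap (len : Nat) (x : Int) (h0 : -len ≤ x) (h1 : x < 0) :
    PySem.List.pyIdx? len x = PySem.List.pyIdx? len (x + len) := by
  simp only [PySem.List.pyIdx?]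
  rw [if_neg (by omega), if_pos h0, if_pos (by omega), if_pos (by omega)]
  congr 1
  omega

theorem pvAt_wrap (s : List Int) (x : Int) (h0 : -s.length ≤ x) (h1 : x < 0) :
    pvAt s x = pvAt s (x + s.length) := by
  simp only [pvAt, PySem.List.pyGetD, PySem.List.pyGet?]
  rw [pyIdx_wrap s.length x h0 h1]

theorem pvSet_wrap (s : List Int) (x v : Int) (h0 : -s.length ≤ x) (h1 : x < 0) :
    pvSet s x v = pvSet s (x + s.length) v := by
  simp only [pvSet, PySem.List.pySetD, PySem.List.pySet?]
  rw [pyIdx_wrap s.length x h0 h1]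

theorem pvSet_noop (s : List Int) (y : Int) (h0 : 0 ≤ y) (hlt : y.toNat < s.length) :
    pvSet s y (pvAt s y) = s := by
  rw [pvSet, PySem.List.pySetD_of_nonneg s _ h0, pvAt_nonneg_eq _ _ h0]
  rw [List.getD_eq_getElem?_getD, List.getElem?_eq_getElem hlt, Option.getD_some]
  exact List.set_getElem_self hlt

def pvInR (n x : Int) : Prop := 0 ≤ x ∧ x < n

def pvIter (s : List Int) (k : Nat) (x : Int) : Int := (pvAt s)^[k] x

def pvInv (n : Int) (s : List Int) : Prop :=
  s.length = n.toNat ∧ (∀ x, pvInR n x → pvInR n (pvAt s x)) ∧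
    (∀ x, pvInR n x → ∃ k, pvAt s (pvIter s k x) = pvIter s k x)

def pvRoot (s : List Int) (x : Int) : Int := pvIter s s.length x

theorem pvIter_zero (s : List Int) (x : Int) : pvIter s 0 x = x := rfl

theorem pvIter_succ (s : List Int) (k : Nat) (x : Int) :
    pvIter s (k+1) x = pvIter s k (pvAt s x) := Function.iterate_succ_apply (pvAt s) k x

theorem pvIter_succ' (s : List Int) (k : Nat) (x : Int) :
    pvIter s (k+1) x = pvAt s (pvIter s k x) := Function.iterate_succ_apply' (pvAt s) k x

theorem pvIter_add (s : List Int) (a b : Nat) (x : Int) :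
    pvIter s (a + b) x = pvIter s a (pvIter s b x) := Function.iterate_add_apply (pvAt s) a b x

theorem pvIter_fix (s : List Int) (y : Int) (h : pvAt s y = y) (k : Nat) : pvIter s k y = y := by
  induction k with
  | zero => rfl
  | succ k ih => rw [pvIter_succ', ih, h]

theorem pvIter_stable (s : List Int) (x : Int) (k : Nat)
    (h : pvAt s (pvIter s k x) = pvIter s k x) (m : Nat) (hm : k ≤ m) :
    pvIter s m x = pvIter s k x := by
  have : m = (m - k) + k := by omega
  rw [this, pvIter_add, pvIter_fix _ _ h]

theorem pvInR_pvIter (n : Int) (s : List Int) (hInv : pvInv n s) (x : Int) (hx : pvInR n x)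
    (k : Nat) : pvInR n (pvIter s k x) := by
  induction k with
  | zero => exact hx
  | succ k ih => rw [pvIter_succ']; exact hInv.2.1 _ ih

-- the root (pvIter over length-many steps) is a fixpoint: pigeonhole on the chain

theorem pvRoot_fix (n : Int) (s : List Int) (hInv : pvInv n s) (x : Int) (hx : pvInR n x) :
    pvAt s (pvRoot s x) = pvRoot s x := by
  obtain ⟨k, hk⟩ := hInv.2.2 x hx
  have hex : ∃ k, pvAt s (pvIter s k x) = pvIter s k x := ⟨k, hk⟩
  classical
  set d := Nat.find hex with hd
  have hfix : pvAt s (pvIter s d x) = pvIter s d x := Nat.find_spec hex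
  -- distinct chain prefix
  have hinj : ∀ i j, i < j → j ≤ d → pvIter s i x ≠ pvIter s j x := by
    intro i j hij hjd heq
    have hit : ∀ m, pvIter s (m + i) x = pvIter s (m + j) x := by
      intro m; rw [pvIter_add, pvIter_add, heq]
    have : pvAt s (pvIter s ((d - j) + i) x) = pvIter s ((d - j) + i) x := by
      rw [hit (d - j)]
      have : (d - j) + j = d := by omega
      rw [this]; exact hfix
    have := Nat.find_min' hex this
    omega
  -- injective map from range (d+1) to Ico 0 n
  have hcard : d + 1 ≤ n.toNat := by
    have hsub : ∀ i ∈ Finset.range (d+1), pvIter s i x ∈ Finset.Ico (0:ℤ) n := by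
      intro i _
      have := pvInR_pvIter n s hInv x hx i
      simp [Finset.mem_Ico]; exact ⟨this.1, this.2⟩
    have hinj' : Set.InjOn (fun i => pvIter s i x) (Finset.range (d+1)) := by
      intro i hi j hj hij
      simp only [Finset.mem_coe, Finset.mem_range] at hi hj
      by_contra hne
      rcases Nat.lt_or_ge i j with h | h
      · exact hinj i j h (by omega) hij
      · exact hinj j i (by omega) (by omega) hij.symm
    have := Finset.card_le_card_of_injOn _ hsub hinj'
    simpa [Int.toNat_of_nonneg] using this
  have hdlen : d ≤ s.length := by
    rw [hInv.1]; omega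
  rw [pvRoot, pvIter_stable s x d hfix s.length hdlen]
  exact hfix

theorem pvRoot_of_fix (n : Int) (s : List Int) (hInv : pvInv n s) (x : Int) (hx : pvInR n x)
    (m : Nat) (hm : pvAt s (pvIter s m x) = pvIter s m x) : pvIter s m x = pvRoot s x := by
  have hroot := pvRoot_fix n s hInv x hx
  have h1 := pvIter_stable s x m hm (max m s.length) (Nat.le_max_left _ _)
  have h2 := pvIter_stable s x s.length hroot (max m s.length) (Nat.le_max_right _ _)
  rw [← h1, h2]; rfl

theorem pvRoot_pAt (n : Int) (s : List Int) (hInv : pvInv n s) (x : Int) (hx : pvInR n x) :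
    pvRoot s (pvAt s x) = pvRoot s x := by
  obtain ⟨m, hm⟩ := hInv.2.2 x hx
  rcases m with _ | m
  · -- x is a root
    simp [pvIter_zero] at hm
    rw [hm]
  · have hfix' : pvAt s (pvIter s m (pvAt s x)) = pvIter s m (pvAt s x) := by
      rw [← pvIter_succ]; exact hm
    have h1 := pvRoot_of_fix n s hInv (pvAt s x) (hInv.2.1 x hx) m hfix'
    have h2 := pvRoot_of_fix n s hInv x hx (m+1) hm
    rw [← h1, ← h2, pvIter_succ]

theorem pvRoot_iter (n : Int) (s : List Int) (hInv : pvInv n s) (x : Int) (hx : pvInR n x)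
    (k : Nat) : pvRoot s (pvIter s k x) = pvRoot s x := by
  induction k generalizing x with
  | zero => rfl
  | succ k ih =>
    rw [pvIter_succ, ih (pvAt s x) (hInv.2.1 x hx), pvRoot_pAt n s hInv x hx]

theorem pvRoot_self_iff (n : Int) (s : List Int) (hInv : pvInv n s) (x : Int) (hx : pvInR n x) :
    pvAt s x = x ↔ pvRoot s x = x := by
  constructor
  · intro h; rw [pvRoot, pvIter_fix s x h]
  · intro h
    have := pvRoot_fix n s hInv x hx
    rw [h] at this; exact this

theorem pvRoot_InR (n : Int) (s : List Int) (hInv : pvInv n s) (x : Int) (hx : pvInR n x) :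
    pvInR n (pvRoot s x) := pvInR_pvIter n s hInv x hx s.length

theorem pvNoCycle (n : Int) (s : List Int) (hInv : pvInv n s) (x : Int) (hx : pvInR n x)
    (i : Nat) (hi : 1 ≤ i) (h : pvIter s i x = x) : pvAt s x = x := by
  have hcyc : ∀ t, pvIter s (t * i) x = x := by
    intro t
    induction t with
    | zero => simp [pvIter_zero]
    | succ t ih => rw [Nat.succ_mul, pvIter_add, h, ih]
  obtain ⟨m, hm⟩ := hInv.2.2 x hx
  have hbig : m ≤ (m + 1) * i := by nlinarith
  have heq := pvIter_stable s x m hm ((m+1) * i) hbig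
  rw [hcyc (m+1)] at heq
  rw [← heq] at hm
  exact hm

-- chain untouched by a pointwise update at w: iterates coincide

theorem pvIter_set_untouched (s : List Int) (w v x : Int) (h0w : 0 ≤ w) (k : Nat)
    (h0 : ∀ i, i < k → 0 ≤ pvIter s i x ∧ pvIter s i x ≠ w) :
    pvIter (pvSet s w v) k x = pvIter s k x := by
  induction k with
  | zero => rfl
  | succ k ih =>
    have hk : ∀ i, i < k → 0 ≤ pvIter s i x ∧ pvIter s i x ≠ w := fun i hi => h0 i (by omega)
    rw [pvIter_succ', pvIter_succ', ih hk]
    exact pvAt_set_ne s w v _ h0w (h0 k (by omega)).1 (h0 k (by omega)).2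

-- nodes strictly later on x's chain are never x itself (acyclicity)

theorem pvChain_ne_self (n : Int) (s : List Int) (hInv : pvInv n s) (x : Int) (hx : pvInR n x)
    (hnr : pvAt s x ≠ x) (i : Nat) (hi : 1 ≤ i) : pvIter s i x ≠ x := by
  intro h
  exact hnr (pvNoCycle n s hInv x hx i hi h)

-- nodes on the chain of (pvIter s j x), j ≥ 1, never equal x

theorem pvChain_tail_ne (n : Int) (s : List Int) (hInv : pvInv n s) (x : Int) (hx : pvInR n x)
    (hnr : pvAt s x ≠ x) (j : Nat) (hj : 1 ≤ j) (i : Nat) :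
    pvIter s i (pvIter s j x) ≠ x := by
  rw [← pvIter_add]
  exact pvChain_ne_self n s hInv x hx hnr (i + j) (by omega)

-- REDIRECT: parent[x] := v where v = pvIter s j x (j ≥ 1) and x is not a root.

theorem pvRedirect (n : Int) (s : List Int) (hInv : pvInv n s) (x : Int) (hx : pvInR n x)
    (hnr : pvAt s x ≠ x) (j : Nat) (hj : 1 ≤ j) :
    pvInv n (pvSet s x (pvIter s j x)) ∧
    (∀ z, pvInR n z → pvRoot (pvSet s x (pvIter s j x)) z = pvRoot s z) ∧
    (∀ i, pvInR n i → (pvAt (pvSet s x (pvIter s j x)) i = i ↔ pvAt s i = i)) := by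
  set v := pvIter s j x with hv
  set s' := pvSet s x v with hs'
  have hvInR : pvInR n v := pvInR_pvIter n s hInv x hx j
  have hvne : v ≠ x := by
    intro h; exact hnr (pvNoCycle n s hInv x hx j hj h)
  have hlen : s'.length = s.length := pvLen_set s x v
  have hat_x : pvAt s' x = v := by
    apply pvAt_set_self s x v hx.1
    rw [hInv.1]
    obtain ⟨hx0, hx1⟩ := hx
    omega
  have hat_ne : ∀ z, 0 ≤ z → z ≠ x → pvAt s' z = pvAt s z := fun z h0 hne =>
    pvAt_set_ne s x v z hx.1 h0 hne
  -- roots of s are preserved as fixpoints in s'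
  have hrootfix : ∀ z, pvInR n z → pvAt s z = z → pvAt s' z = z := by
    intro z hz hfz
    have : z ≠ x := fun h => hnr (h ▸ hfz)
    rw [hat_ne z hz.1 this]; exact hfz
  -- main reach claim by strong induction on a fix index
  have hreach : ∀ d, ∀ z, pvInR n z → pvAt s (pvIter s d z) = pvIter s d z →
      ∃ m, pvIter s' m z = pvRoot s z := by
    intro d
    induction d using Nat.strong_induction_on with
    | _ d ih =>
      intro z hz hfz
      by_cases hroot : pvAt s z = z
      · exact ⟨0, ((pvRoot_self_iff n s hInv z hz).1 hroot).symm⟩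
      · rcases d with _ | d
        · simp [pvIter_zero] at hfz; exact absurd hfz hroot
        · by_cases hzx : z = x
          · subst hzx
            -- step to v; fix index for v is d (since j ≥ 1)
            have hfv : pvAt s (pvIter s d v) = pvIter s d v := by
              rw [hv, ← pvIter_add]
              have hge : d + 1 ≤ d + j := by omega
              have h1 := pvIter_stable s z (d+1) hfz (d + j) hge
              rw [h1]; exact hfz
            obtain ⟨m, hm⟩ := ih d (by omega) v hvInR hfv
            refine ⟨m + 1, ?_⟩
            rw [pvIter_succ, hat_x, hm, hv, pvRoot_iter n s hInv z hz j]
          · have hfp : pvAt s (pvIter s d (pvAt s z)) = pvIter s d (pvAt s z) := by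
              rw [← pvIter_succ]; exact hfz
            obtain ⟨m, hm⟩ := ih d (by omega) (pvAt s z) (hInv.2.1 z hz) hfp
            refine ⟨m + 1, ?_⟩
            rw [pvIter_succ, hat_ne z hz.1 hzx, hm, pvRoot_pAt n s hInv z hz]
  have hInv' : pvInv n s' := by
    refine ⟨by rw [hlen, hInv.1], ?_, ?_⟩
    · intro z hz
      by_cases hzx : z = x
      · rw [hzx, hat_x]; exact hvInR
      · rw [hat_ne z hz.1 hzx]; exact hInv.2.1 z hz
    · intro z hz
      obtain ⟨d, hd⟩ := hInv.2.2 z hz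
      obtain ⟨m, hm⟩ := hreach d z hz hd
      refine ⟨m, ?_⟩
      rw [hm]
      exact hrootfix _ (pvRoot_InR n s hInv z hz) (pvRoot_fix n s hInv z hz)
  have hroots : ∀ z, pvInR n z → pvRoot s' z = pvRoot s z := by
    intro z hz
    obtain ⟨d, hd⟩ := hInv.2.2 z hz
    obtain ⟨m, hm⟩ := hreach d z hz hd
    have hfix' : pvAt s' (pvIter s' m z) = pvIter s' m z := by
      rw [hm]
      exact hrootfix _ (pvRoot_InR n s hInv z hz) (pvRoot_fix n s hInv z hz)
    have := pvRoot_of_fix n s' hInv' z hz m hfix'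
    rw [← this, hm]
  refine ⟨hInv', hroots, ?_⟩
  intro i hi
  by_cases hix : i = x
  · subst hix
    rw [hat_x]
    constructor
    · intro h; exact absurd h hvne
    · intro h; exact absurd h hnr
  · rw [hat_ne i hi.1 hix]

-- MERGE: parent[ry] := rx for two distinct roots

theorem pvMerge (n : Int) (s : List Int) (hInv : pvInv n s) (rx ry : Int)
    (hrx : pvInR n rx) (hry : pvInR n ry) (hfx : pvAt s rx = rx) (hfy : pvAt s ry = ry)
    (hne : rx ≠ ry) :
    pvInv n (pvSet s ry rx) ∧
    (∀ z, pvInR n z → pvRoot (pvSet s ry rx) z =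
        if pvRoot s z = ry then rx else pvRoot s z) ∧
    (∀ i, pvInR n i → (pvAt (pvSet s ry rx) i = i ↔ (pvAt s i = i ∧ i ≠ ry))) := by
  set s' := pvSet s ry rx with hs'
  have hlen : s'.length = s.length := pvLen_set s ry rx
  have hat_ry : pvAt s' ry = rx := by
    apply pvAt_set_self s ry rx hry.1
    rw [hInv.1]
    obtain ⟨h0, h1⟩ := hry
    omega
  have hat_ne : ∀ z, 0 ≤ z → z ≠ ry → pvAt s' z = pvAt s z := fun z h0 hz =>
    pvAt_set_ne s ry rx z hry.1 h0 hz
  have hat_rx : pvAt s' rx = rx := by rw [hat_ne rx hrx.1 hne]; exact hfx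
  -- case 1: root ≠ ry → chain never meets ry, unchanged
  have havoid : ∀ z, pvInR n z → pvRoot s z ≠ ry → ∀ i, pvIter s i z ≠ ry := by
    intro z hz hr i h
    apply hr
    have := pvRoot_of_fix n s hInv z hz i (by rw [h]; exact hfy)
    rw [← this, h]
  have hsame : ∀ z, pvInR n z → pvRoot s z ≠ ry → ∀ i, pvIter s' i z = pvIter s i z := by
    intro z hz hr i
    rw [hs']
    apply pvIter_set_untouched s ry rx z hry.1
    intro m _
    exact ⟨(pvInR_pvIter n s hInv z hz m).1, havoid z hz hr m⟩
  -- case 2: root = ry → chain reaches ry, then rx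
  have hhit : ∀ z, pvInR n z → pvRoot s z = ry →
      ∃ m, pvIter s' m z = rx := by
    intro z hz hr
    obtain ⟨d0, hd0⟩ := hInv.2.2 z hz
    have hex : ∃ d, pvAt s (pvIter s d z) = pvIter s d z := ⟨d0, hd0⟩
    classical
    set d := Nat.find hex with hdd
    have hd : pvAt s (pvIter s d z) = pvIter s d z := Nat.find_spec hex
    have hdroot : pvIter s d z = ry := by
      rw [pvRoot_of_fix n s hInv z hz d hd, hr]
    have hpre : ∀ i, i < d → pvIter s i z ≠ ry := by
      intro i hi h
      have : pvAt s (pvIter s i z) = pvIter s i z := by rw [h]; exact hfy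
      have := Nat.find_min' hex this
      omega
    have hiter : pvIter s' d z = pvIter s d z := by
      rw [hs']
      apply pvIter_set_untouched s ry rx z hry.1
      intro m hm
      exact ⟨(pvInR_pvIter n s hInv z hz m).1, hpre m hm⟩
    refine ⟨d + 1, ?_⟩
    rw [pvIter_succ', hiter, hdroot, hat_ry]
  have hreach : ∀ z, pvInR n z → ∃ m, pvAt s' (pvIter s' m z) = pvIter s' m z := by
    intro z hz
    by_cases hr : pvRoot s z = ry
    · obtain ⟨m, hm⟩ := hhit z hz hr
      exact ⟨m, by rw [hm]; exact hat_rx⟩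
    · obtain ⟨d, hd⟩ := hInv.2.2 z hz
      refine ⟨d, ?_⟩
      rw [hsame z hz hr d]
      have hdne : pvIter s d z ≠ ry := havoid z hz hr d
      rw [hat_ne _ (pvInR_pvIter n s hInv z hz d).1 hdne]
      exact hd
  have hInv' : pvInv n s' := by
    refine ⟨by rw [hlen, hInv.1], ?_, hreach⟩
    intro z hz
    by_cases hzy : z = ry
    · rw [hzy, hat_ry]; exact hrx
    · rw [hat_ne z hz.1 hzy]; exact hInv.2.1 z hz
  refine ⟨hInv', ?_, ?_⟩
  · intro z hz
    by_cases hr : pvRoot s z = ry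
    · obtain ⟨m, hm⟩ := hhit z hz hr
      rw [if_pos hr]
      have := pvRoot_of_fix n s' hInv' z hz m (by rw [hm]; exact hat_rx)
      rw [← this, hm]
    · obtain ⟨d, hd⟩ := hInv.2.2 z hz
      rw [if_neg hr]
      have hfix' : pvAt s' (pvIter s' d z) = pvIter s' d z := by
        rw [hsame z hz hr d, hat_ne _ (pvInR_pvIter n s hInv z hz d).1 (havoid z hz hr d)]
        exact hd
      have := pvRoot_of_fix n s' hInv' z hz d hfix'
      rw [← this, hsame z hz hr d]
      exact pvRoot_of_fix n s hInv z hz d hd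
  · intro i hi
    by_cases hiy : i = ry
    · subst hiy
      rw [hat_ry]
      constructor
      · intro h; exact absurd h (by omega)
      · intro h; exact absurd rfl h.2
    · rw [hat_ne i hi.1 hiy]
      exact ⟨fun h => ⟨h, hiy⟩, fun h => h.1⟩

def pvFindOK (n : Int) (s : List Int) (x : Int) (out : List Int × Int) : Prop :=
  out.2 = pvRoot s x ∧ pvInv n out.1 ∧ out.1.length = s.length ∧
  (∀ z, pvInR n z → pvRoot out.1 z = pvRoot s z) ∧
  (∀ i, pvInR n i → (pvAt out.1 i = i ↔ pvAt s i = i))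

theorem pvFindOK_root (n : Int) (s : List Int) (x : Int) (hInv : pvInv n s) (hx : pvInR n x)
    (h : pvAt s x = x) : pvFindOK n s x (s, x) := by
  refine ⟨((pvRoot_self_iff n s hInv x hx).1 h).symm, hInv, rfl, fun z _ => rfl, fun i _ => Iff.rfl⟩

theorem pvIter_two (s : List Int) (x : Int) : pvIter s 2 x = pvAt s (pvAt s x) := by
  show (pvAt s)^[2] x = _
  simp [Function.iterate_succ_apply']

theorem findA_spec (fuel : Nat) : ∀ (d : Nat) (n : Int) (s : List Int) (x : Int),
    pvInv n s → pvInR n x → pvAt s (pvIter s d x) = pvIter s d x → d ≤ fuel →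
    pvFindOK n s x (findA fuel s x) := by
  induction fuel with
  | zero =>
    intro d n s x hInv hx hfix hd
    have hd0 : d = 0 := by omega
    subst hd0
    rw [pvIter_zero] at hfix
    exact pvFindOK_root n s x hInv hx hfix
  | succ fuel ih =>
    intro d n s x hInv hx hfix hd
    by_cases hroot : pvAt s x = x
    · rw [findA, if_neg (by simpa using hroot)]
      exact pvFindOK_root n s x hInv hx hroot
    · have hd1 : 1 ≤ d := by
        rcases Nat.eq_zero_or_pos d with h | h
        · subst h; rw [pvIter_zero] at hfix; exact absurd hfix hroot
        · omega
      have hv2 : pvAt s (pvAt s x) = pvIter s 2 x := (pvIter_two s x).symm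
      obtain ⟨hInv', hroots', hriff'⟩ := pvRedirect n s hInv x hx hroot 2 (by omega)
      set v := pvIter s 2 x with hvv
      set s' := pvSet s x v with hs'
      have hvInR : pvInR n v := pvInR_pvIter n s hInv x hx 2
      have hat_x : pvAt s' x = v := by
        apply pvAt_set_self s x v hx.1
        rw [hInv.1]; obtain ⟨h0, h1⟩ := hx; omega
      -- fix index d-1 for v in s
      have hfv : pvAt s (pvIter s (d-1) v) = pvIter s (d-1) v := by
        rw [hvv, ← pvIter_add]
        have h1 := pvIter_stable s x d hfix (d - 1 + 2) (by omega)
        rw [h1]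
        exact hfix
      -- chains of v avoid x, so s and s' agree along them
      have huntouched : ∀ i, pvIter s' i v = pvIter s i v := by
        intro i
        rw [hs']
        apply pvIter_set_untouched s x v v hx.1
        intro m _
        refine ⟨(pvInR_pvIter n s hInv v hvInR m).1, ?_⟩
        rw [hvv]
        exact pvChain_tail_ne n s hInv x hx hroot 2 (by omega) m
      have hfv' : pvAt s' (pvIter s' (d-1) v) = pvIter s' (d-1) v := by
        rw [huntouched]
        have hnode_ne : pvIter s (d-1) v ≠ x := by
          rw [hvv]; exact pvChain_tail_ne n s hInv x hx hroot 2 (by omega) (d-1)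
        rw [pvAt_set_ne s x v _ hx.1 (pvInR_pvIter n s hInv v hvInR (d-1)).1 hnode_ne]
        exact hfv
      have hres := ih (d-1) n s' v hInv' hvInR hfv' (by omega)
      rw [findA, if_pos (by simpa using hroot)]
      simp only [← hs', hv2, hat_x]
      obtain ⟨h1, h2, h3, h4, h5⟩ := hres
      refine ⟨?_, h2, ?_, ?_, ?_⟩
      · rw [h1, hroots' v hvInR, hvv, pvRoot_iter n s hInv x hx 2]
      · rw [h3, pvLen_set]
      · intro z hz; rw [h4 z hz, hroots' z hz]
      · intro i hi; rw [h5 i hi, hriff' i hi]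

theorem findA_run (n : Int) (s : List Int) (x : Int) (hInv : pvInv n s) (hx : pvInR n x) :
    pvFindOK n s x (findA s.length s x) :=
  findA_spec s.length s.length n s x hInv hx (pvRoot_fix n s hInv x hx) le_rfl

-- negative (Python-wrapped) indices: find/union behave as on the wrapped index
def pvW (n x : Int) : Prop := -n ≤ x ∧ x < n

def pvNorm (n x : Int) : Int := if x < 0 then x + n else x

theorem pvNorm_InR (n x : Int) (h : pvW n x) : pvInR n (pvNorm n x) := by
  unfold pvNorm
  obtain ⟨h0, h1⟩ := h
  split_ifs with hx <;> exact ⟨by omega, by omega⟩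

theorem findA_root_any (fuel : Nat) (s : List Int) (y : Int) (h : pvAt s y = y) :
    findA fuel s y = (s, y) := by
  cases fuel with
  | zero => rfl
  | succ m => rw [findA, if_neg (by simpa using h)]

theorem findA_wrap (n : Int) (s : List Int) (x : Int) (hInv : pvInv n s) (hn0 : 0 ≤ n)
    (hw : pvW n x) : findA s.length s x = findA s.length s (pvNorm n x) := by
  by_cases hx0 : 0 ≤ x
  · rw [pvNorm, if_neg (by omega)]
  · rw [pvNorm, if_pos (by omega)]
    obtain ⟨hwl, hwr⟩ := hw
    have hlen : (s.length : Int) = n := by rw [hInv.1]; omega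
    have hy : pvInR n (x + n) := ⟨by omega, by omega⟩
    have hy0 : (0:Int) ≤ x + n := hy.1
    have hylt : (x + n).toNat < s.length := by rw [hInv.1]; omega
    have hats : pvAt s x = pvAt s (x + n) := by
      rw [pvAt_wrap s x (by omega) (by omega), hlen]
    have hsets : ∀ v, pvSet s x v = pvSet s (x + n) v := by
      intro v
      rw [pvSet_wrap s x v (by omega) (by omega), hlen]
    have hn1 : 1 ≤ s.length := by omega
    obtain ⟨m, hm⟩ : ∃ m, s.length = m + 1 := ⟨s.length - 1, by omega⟩
    by_cases hroot : pvAt s (x + n) = x + n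
    · rw [findA_root_any s.length s (x + n) hroot, hm, findA]
      rw [if_pos (by simp only [hats, hroot]; omega)]
      have hnoop : pvSet s x (pvAt s (pvAt s x)) = s := by
        rw [hats, hroot, hsets]
        exact pvSet_noop s (x + n) hy0 hylt
      rw [hnoop]
      show findA m s (pvAt s x) = (s, x + n)
      rw [hats, hroot]
      exact findA_root_any m s (x + n) hroot
    · have hp0 : 0 ≤ pvAt s (x + n) := (hInv.2.1 (x + n) hy).1
      rw [hm, findA, findA]
      rw [if_pos (by simp only [hats]; omega), if_pos (by simpa using hroot)]
      have hset2 : pvSet s x (pvAt s (pvAt s x)) = pvSet s (x + n) (pvAt s (pvAt s (x + n))) := by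
        rw [hats, hsets]
      simp only [hset2]
      congr 1
      set s' := pvSet s (x + n) (pvAt s (pvAt s (x + n))) with hs'
      have hlen' : s'.length = s.length := pvLen_set _ _ _
      have : pvAt s' x = pvAt s' (x + n) := by
        rw [pvAt_wrap s' x (by omega) (by omega), hlen', hlen]
      rw [this]

theorem unionA_wrap (n : Int) (s : List Int) (x y : Int) (hInv : pvInv n s) (hn0 : 0 ≤ n)
    (hx : pvW n x) (hy : pvW n y) :
    unionA s x y = unionA s (pvNorm n x) (pvNorm n y) := by
  obtain ⟨_, pInv, _, _, _⟩ := findA_run n s (pvNorm n x) hInv (pvNorm_InR n x hx)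
  have heqL : unionA s x y =
      (if (findA s.length s x).2 = (findA (findA s.length s x).1.length (findA s.length s x).1 y).2
       then ((findA (findA s.length s x).1.length (findA s.length s x).1 y).1, false)
       else (pvSet (findA (findA s.length s x).1.length (findA s.length s x).1 y).1
               (findA (findA s.length s x).1.length (findA s.length s x).1 y).2
               (findA s.length s x).2, true)) := rfl
  have heqR : unionA s (pvNorm n x) (pvNorm n y) =
      (if (findA s.length s (pvNorm n x)).2 = (findA (findA s.length s (pvNorm n x)).1.length (findA s.length s (pvNorm n x)).1 (pvNorm n y)).2
       then ((findA (findA s.length s (pvNorm n x)).1.length (findA s.length s (pvNorm n x)).1 (pvNorm n y)).1, false)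
       else (pvSet (findA (findA s.length s (pvNorm n x)).1.length (findA s.length s (pvNorm n x)).1 (pvNorm n y)).1
               (findA (findA s.length s (pvNorm n x)).1.length (findA s.length s (pvNorm n x)).1 (pvNorm n y)).2
               (findA s.length s (pvNorm n x)).2, true)) := rfl
  rw [heqL, heqR, findA_wrap n s x hInv hn0 hx, findA_wrap n _ y pInv hn0 hy]

def pvNR (n : Int) (s : List Int) : Nat :=
  ((Finset.range n.toNat).filter (fun i : Nat => pvAt s (i : Int) = (i : Int))).card

theorem pvInR_of_mem_range (n : Int) (i : Nat) (h : i ∈ Finset.range n.toNat) :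
    pvInR n (i : Int) := by
  simp only [Finset.mem_range] at h
  constructor <;> omega

theorem pvNR_congr (n : Int) (s s' : List Int)
    (h : ∀ i, pvInR n i → (pvAt s' i = i ↔ pvAt s i = i)) : pvNR n s' = pvNR n s := by
  unfold pvNR
  congr 1
  ext i
  simp only [Finset.mem_filter, Finset.mem_range]
  constructor
  · intro ⟨hi, hp⟩
    exact ⟨hi, (h (i : Int) (pvInR_of_mem_range n i (Finset.mem_range.2 hi))).1 hp⟩
  · intro ⟨hi, hp⟩
    exact ⟨hi, (h (i : Int) (pvInR_of_mem_range n i (Finset.mem_range.2 hi))).2 hp⟩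

theorem pvRootMem (n : Int) (s : List Int) (r : Int) (hr : pvInR n r) (hf : pvAt s r = r) :
    r.toNat ∈ (Finset.range n.toNat).filter (fun i : Nat => pvAt s (i : Int) = (i : Int)) := by
  obtain ⟨h0, h1⟩ := hr
  have hcast : ((r.toNat : Nat) : Int) = r := Int.toNat_of_nonneg h0
  simp only [Finset.mem_filter, Finset.mem_range]
  exact ⟨by omega, by rw [hcast]; exact hf⟩

theorem pvNR_erase (n : Int) (s s' : List Int) (ry : Int) (hry : pvInR n ry)
    (hfy : pvAt s ry = ry)
    (h : ∀ i, pvInR n i → (pvAt s' i = i ↔ (pvAt s i = i ∧ i ≠ ry))) :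
    pvNR n s' = pvNR n s - 1 ∧ 1 ≤ pvNR n s := by
  have hmem := pvRootMem n s ry hry hfy
  have hset : (Finset.range n.toNat).filter (fun i : Nat => pvAt s' (i : Int) = (i : Int)) =
      ((Finset.range n.toNat).filter (fun i : Nat => pvAt s (i : Int) = (i : Int))).erase ry.toNat := by
    ext i
    simp only [Finset.mem_filter, Finset.mem_range, Finset.mem_erase]
    constructor
    · intro ⟨hi, hp⟩
      have := (h (i : Int) (pvInR_of_mem_range n i (by simp [Finset.mem_range, hi]))).1 hp
      refine ⟨?_, hi, this.1⟩
      intro he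
      apply this.2
      obtain ⟨h0, _⟩ := hry
      omega
    · intro ⟨hne, hi, hp⟩
      refine ⟨hi, (h (i : Int) (pvInR_of_mem_range n i (by simp [Finset.mem_range, hi]))).2 ⟨hp, ?_⟩⟩
      intro he
      apply hne
      omega
  constructor
  · rw [pvNR, hset, Finset.card_erase_of_mem hmem]; rfl
  · have := Finset.card_pos.2 ⟨ry.toNat, hmem⟩
    exact this

theorem pvNR_pos (n : Int) (s : List Int) (hInv : pvInv n s) (x : Int) (hx : pvInR n x) :
    1 ≤ pvNR n s := by
  have hmem := pvRootMem n s (pvRoot s x) (pvRoot_InR n s hInv x hx) (pvRoot_fix n s hInv x hx)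
  exact Finset.card_pos.2 ⟨_, hmem⟩

theorem pvNR_one_roots_eq (n : Int) (s : List Int) (hInv : pvInv n s) (h1 : pvNR n s = 1)
    (x y : Int) (hx : pvInR n x) (hy : pvInR n y) : pvRoot s x = pvRoot s y := by
  have hmx := pvRootMem n s (pvRoot s x) (pvRoot_InR n s hInv x hx) (pvRoot_fix n s hInv x hx)
  have hmy := pvRootMem n s (pvRoot s y) (pvRoot_InR n s hInv y hy) (pvRoot_fix n s hInv y hy)
  have := Finset.card_le_one.1 (le_of_eq h1) _ hmx _ hmy
  have hx0 := (pvRoot_InR n s hInv x hx).1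
  have hy0 := (pvRoot_InR n s hInv y hy).1
  omega

theorem pvNR_two (n : Int) (s : List Int) (rx ry : Int) (hrx : pvInR n rx) (hry : pvInR n ry)
    (hfx : pvAt s rx = rx) (hfy : pvAt s ry = ry) (hne : rx ≠ ry) : 2 ≤ pvNR n s := by
  have hmx := pvRootMem n s rx hrx hfx
  have hmy := pvRootMem n s ry hry hfy
  apply Finset.one_lt_card.2
  exact ⟨rx.toNat, hmx, ry.toNat, hmy, by obtain ⟨a,_⟩ := hrx; obtain ⟨b,_⟩ := hry; omega⟩

-- union conclusions

def pvUnionOK (n : Int) (s : List Int) (x y : Int) (out : List Int × Bool) : Prop :=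
  (out.2 = true ↔ pvRoot s x ≠ pvRoot s y) ∧ pvInv n out.1 ∧ out.1.length = s.length ∧
  (∀ z, pvInR n z → pvRoot out.1 z =
      if pvRoot s z = pvRoot s y ∧ pvRoot s x ≠ pvRoot s y then pvRoot s x else pvRoot s z) ∧
  (pvNR n out.1 = if out.2 = true then pvNR n s - 1 else pvNR n s) ∧
  (out.2 = true → 2 ≤ pvNR n s)

theorem pvUnionGen (f : Nat → List Int → Int → List Int × Int)
    (hf : ∀ (n : Int) (s : List Int) (x : Int), pvInv n s → pvInR n x →
        pvFindOK n s x (f s.length s x))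
    (n : Int) (s : List Int) (x y : Int) (hInv : pvInv n s) (hx : pvInR n x) (hy : pvInR n y) :
    pvUnionOK n s x y
      (if (f s.length s x).2 = (f (f s.length s x).1.length (f s.length s x).1 y).2
       then ((f (f s.length s x).1.length (f s.length s x).1 y).1, false)
       else (pvSet (f (f s.length s x).1.length (f s.length s x).1 y).1
               (f (f s.length s x).1.length (f s.length s x).1 y).2 (f s.length s x).2, true)) := by
  obtain ⟨p2, pInv, plen, proots, priff⟩ := hf n s x hInv hx
  set p := f s.length s x with hp
  obtain ⟨q2, qInv, qlen, qroots, qriff⟩ := hf n p.1 y pInv hy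
  set q := f p.1.length p.1 y with hq
  have hq2 : q.2 = pvRoot s y := by rw [q2, proots y hy]
  have hroots2 : ∀ z, pvInR n z → pvRoot q.1 z = pvRoot s z := by
    intro z hz; rw [qroots z hz, proots z hz]
  have hriff2 : ∀ i, pvInR n i → (pvAt q.1 i = i ↔ pvAt s i = i) := by
    intro i hi; rw [qriff i hi, priff i hi]
  by_cases hcase : p.2 = q.2
  · rw [if_pos hcase]
    have heq : pvRoot s x = pvRoot s y := by rw [← p2, ← hq2, hcase]
    refine ⟨by simp [heq], qInv, by rw [qlen, plen], ?_, ?_, by simp⟩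
    · intro z hz
      rw [if_neg (by simp [heq]), hroots2 z hz]
    · simp only [if_neg (by simp : ¬ (false = true))]
      rw [pvNR_congr n s q.1 hriff2]
  · rw [if_neg hcase]
    have hne : pvRoot s x ≠ pvRoot s y := by rw [← p2, ← hq2]; exact hcase
    have hrx : pvInR n (pvRoot s x) := pvRoot_InR n s hInv x hx
    have hry : pvInR n (pvRoot s y) := pvRoot_InR n s hInv y hy
    have hfxs : pvAt s (pvRoot s x) = pvRoot s x := pvRoot_fix n s hInv x hx
    have hfys : pvAt s (pvRoot s y) = pvRoot s y := pvRoot_fix n s hInv y hy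
    have hfxq : pvAt q.1 (pvRoot s x) = pvRoot s x := (hriff2 _ hrx).2 hfxs
    have hfyq : pvAt q.1 (pvRoot s y) = pvRoot s y := (hriff2 _ hry).2 hfys
    obtain ⟨mInv, mroots, mriff⟩ :=
      pvMerge n q.1 qInv (pvRoot s x) (pvRoot s y) hrx hry hfxq hfyq hne
    rw [p2, hq2]
    have hriff3 : ∀ i, pvInR n i →
        (pvAt (pvSet q.1 (pvRoot s y) (pvRoot s x)) i = i ↔ (pvAt s i = i ∧ i ≠ pvRoot s y)) := by
      intro i hi
      rw [mriff i hi, hriff2 i hi]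
    obtain ⟨hNR, _⟩ := pvNR_erase n s _ (pvRoot s y) hry hfys hriff3
    refine ⟨by simp [hne], mInv, by rw [pvLen_set, qlen, plen], ?_, ?_, ?_⟩
    · intro z hz
      rw [mroots z hz, hroots2 z hz]
      by_cases hc : pvRoot s z = pvRoot s y
      · rw [if_pos hc, if_pos ⟨hc, hne⟩]
      · rw [if_neg hc, if_neg (by tauto)]
    · simpa using hNR
    · intro _
      exact pvNR_two n s (pvRoot s x) (pvRoot s y) hrx hry hfxs hfys hne

theorem unionA_spec (n : Int) (s : List Int) (x y : Int) (hInv : pvInv n s)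
    (hx : pvInR n x) (hy : pvInR n y) : pvUnionOK n s x y (unionA s x y) := by
  have h := pvUnionGen findA (fun n s x h1 h2 => findA_run n s x h1 h2) n s x y hInv hx hy
  have heq : unionA s x y =
      (if (findA s.length s x).2 = (findA (findA s.length s x).1.length (findA s.length s x).1 y).2
       then ((findA (findA s.length s x).1.length (findA s.length s x).1 y).1, false)
       else (pvSet (findA (findA s.length s x).1.length (findA s.length s x).1 y).1
               (findA (findA s.length s x).1.length (findA s.length s x).1 y).2
               (findA s.length s x).2, true)) := rfl
  rw [heq]
  exact h

theorem unionA_specW (n : Int) (s : List Int) (x y : Int) (hInv : pvInv n s) (hn0 : 0 ≤ n)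
    (hx : pvW n x) (hy : pvW n y) :
    pvUnionOK n s (pvNorm n x) (pvNorm n y) (unionA s x y) := by
  rw [unionA_wrap n s x y hInv hn0 hx hy]
  exact unionA_spec n s _ _ hInv (pvNorm_InR n x hx) (pvNorm_InR n y hy)

-- root-partition equality of two union-find states

def pvRel (n : Int) (sA sB : List Int) : Prop :=
  pvInv n sA ∧ pvInv n sB ∧ (∀ z, pvInR n z → pvRoot sA z = pvRoot sB z)

theorem pvRel_NR (n : Int) (sA sB : List Int) (h : pvRel n sA sB) : pvNR n sA = pvNR n sB := by
  apply pvNR_congr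
  intro i hi
  rw [pvRoot_self_iff n sA h.1 i hi, pvRoot_self_iff n sB h.2.1 i hi, h.2.2 i hi]

theorem pvUnion_pairAA (n : Int) (sA sB : List Int) (x y : Int) (hRel : pvRel n sA sB)
    (hn0 : 0 ≤ n) (hx : pvW n x) (hy : pvW n y) :
    (unionA sA x y).2 = (unionA sB x y).2 ∧
    pvRel n (unionA sA x y).1 (unionA sB x y).1 ∧
    pvNR n (unionA sA x y).1 =
      (if (unionA sA x y).2 = true then pvNR n sA - 1 else pvNR n sA) ∧
    ((unionA sA x y).2 = true → 2 ≤ pvNR n sA) := by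
  obtain ⟨hIA, hIB, hRoots⟩ := hRel
  obtain ⟨ha2, haInv, _, haRoots, haNR, haTwo⟩ := unionA_specW n sA x y hIA hn0 hx hy
  obtain ⟨hb2, hbInv, _, hbRoots, _, _⟩ := unionA_specW n sB x y hIB hn0 hx hy
  have hxI := pvNorm_InR n x hx
  have hyI := pvNorm_InR n y hy
  have hsame : (pvRoot sA (pvNorm n x) ≠ pvRoot sA (pvNorm n y)) ↔
      (pvRoot sB (pvNorm n x) ≠ pvRoot sB (pvNorm n y)) := by
    rw [hRoots _ hxI, hRoots _ hyI]
  have hbb : (unionA sA x y).2 = (unionA sB x y).2 := by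
    by_cases hc : pvRoot sA (pvNorm n x) ≠ pvRoot sA (pvNorm n y)
    · rw [ha2.2 hc, hb2.2 (hsame.1 hc)]
    · cases h2a : (unionA sA x y).2 with
      | true => exact absurd (ha2.1 h2a) hc
      | false =>
        cases h2b : (unionA sB x y).2 with
        | true => exact absurd (hsame.2 (hb2.1 h2b)) hc
        | false => rfl
  refine ⟨hbb, ⟨haInv, hbInv, ?_⟩, haNR, haTwo⟩
  intro z hz
  rw [haRoots z hz, hbRoots z hz, hRoots z hz, hRoots _ hxI, hRoots _ hyI]

-- ghost uncapped union-find fold (B's DFS component counts are matched against its root count)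

def ufFold (es : List (Int × Int)) (s : List Int) : List Int :=
  es.foldl (fun s e => (unionA s e.1 e.2).1) s

def hWEdges (n : Int) (es : List (Int × Int)) : Prop := ∀ e ∈ es, pvW n e.1 ∧ pvW n e.2

theorem ufFold_append (es1 es2 : List (Int × Int)) (s : List Int) :
    ufFold (es1 ++ es2) s = ufFold es2 (ufFold es1 s) := List.foldl_append

theorem ufFold_inv (n : Int) (hn0 : 0 ≤ n) : ∀ (es : List (Int × Int)) (s : List Int),
    pvInv n s → hWEdges n es → pvInv n (ufFold es s) := by
  intro es
  induction es with
  | nil => intro s h _; exact h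
  | cons e es ih =>
    intro s hInv hW
    obtain ⟨_, hInv', _, _, _, _⟩ :=
      unionA_specW n s e.1 e.2 hInv hn0 (hW e (by simp)).1 (hW e (by simp)).2
    exact ih _ hInv' (fun g hg => hW g (by simp [hg]))

-- loop step functions (the exact fold bodies of the two ports / the ghost fold)

def stepMA (st : Option (List Int × Int)) (e : Int × Int × Int) : Option (List Int × Int) :=
  match st with
  | none => none
  | some (p, comp) =>
    let r := unionA p e.1 e.2.1
    if r.2 then some (r.1, comp - 1) else none

def stepGA (st : List Int × Int) (e : Int × Int) : List Int × Int :=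
  if st.2 = 1 then st
  else
    let r := unionA st.1 e.1 e.2
    (r.1, if r.2 then st.2 - 1 else st.2)

def stepU (st : List Int × Int) (e : Int × Int) : List Int × Int :=
  let r := unionA st.1 e.1 e.2
  (r.1, if r.2 then st.2 - 1 else st.2)

def stepBA (k : Int) (st : List Int × Int × Int) (e : Int × Int) : List Int × Int × Int :=
  if st.2.1 = 1 then st
  else if st.2.2 ≥ k then st
  else
    let r := unionA st.1 e.1 e.2
    if r.2 then (r.1, st.2.1 - 1, st.2.2 + 1) else (r.1, st.2.1, st.2.2)

theorem stepMA_none (ms : List (Int × Int × Int)) : ms.foldl stepMA none = none := by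
  induction ms with
  | nil => rfl
  | cons e ms ih => simpa [stepMA] using ih

theorem stepU_run (n : Int) (hn0 : 0 ≤ n) : ∀ (es : List (Int × Int)) (s : List Int) (c : Int),
    pvInv n s → hWEdges n es → c = (pvNR n s : Int) →
    (es.foldl stepU (s, c)).1 = ufFold es s ∧
      (es.foldl stepU (s, c)).2 = (pvNR n (ufFold es s) : Int) := by
  intro es
  induction es with
  | nil => intro s c _ _ hc; exact ⟨rfl, hc⟩
  | cons e es ih =>
    intro s c hInv hW hc
    obtain ⟨_, hInv', _, _, hNR, hTwo⟩ :=
      unionA_specW n s e.1 e.2 hInv hn0 (hW e (by simp)).1 (hW e (by simp)).2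
    have hstep : stepU (s, c) e =
        ((unionA s e.1 e.2).1, if (unionA s e.1 e.2).2 then c - 1 else c) := rfl
    rw [List.foldl_cons, hstep]
    have hW' : hWEdges n es := fun g hg => hW g (by simp [hg])
    have hc' : (if (unionA s e.1 e.2).2 then c - 1 else c) =
        (pvNR n (unionA s e.1 e.2).1 : Int) := by
      cases hu : (unionA s e.1 e.2).2 with
      | false => rw [hNR]; simp [hu, hc]
      | true =>
        have := hTwo hu
        rw [hNR]
        simp only [hu, if_true]
        rw [hc]
        push_cast [Nat.cast_sub (by omega : 1 ≤ pvNR n s)]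
        ring
    exact ih _ _ hInv' hW' hc'

theorem mustLoop2 (n : Int) (hn0 : 0 ≤ n) :
    ∀ (ms : List (Int × Int × Int)) (s : List Int) (c : Int), pvInv n s →
      (∀ e ∈ ms, pvW n e.1 ∧ pvW n e.2.1) → c = (pvNR n s : Int) →
      (c - ms.length ≤ (pvNR n (ufFold (ms.map (fun e => (e.1, e.2.1))) s) : Int)) ∧
      ms.foldl stepMA (some (s, c)) =
        (if (pvNR n (ufFold (ms.map (fun e => (e.1, e.2.1))) s) : Int) = c - ms.length
         then some (ufFold (ms.map (fun e => (e.1, e.2.1))) s, c - ms.length) else none) := by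
  intro ms
  induction ms with
  | nil =>
    intro s c hInv _ hc
    simp only [List.map_nil, List.length_nil, Nat.cast_zero, sub_zero, List.foldl_nil]
    have hF : ufFold [] s = s := rfl
    rw [hF]
    exact ⟨le_of_eq hc, by rw [if_pos hc.symm]⟩
  | cons e ms ih =>
    intro s c hInv hW hc
    obtain ⟨hu2, hInv', _, _, hNR, hTwo⟩ :=
      unionA_specW n s e.1 e.2.1 hInv hn0 (hW e (by simp)).1 (hW e (by simp)).2
    have hW' : ∀ g ∈ ms, pvW n g.1 ∧ pvW n g.2.1 := fun g hg => hW g (by simp [hg])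
    have hstep : stepMA (some (s, c)) e =
        (if (unionA s e.1 e.2.1).2 then some ((unionA s e.1 e.2.1).1, c - 1) else none) := rfl
    have hmap : (e :: ms).map (fun e => (e.1, e.2.1)) =
        (e.1, e.2.1) :: ms.map (fun e => (e.1, e.2.1)) := rfl
    have hFcons : ufFold ((e :: ms).map (fun e => (e.1, e.2.1))) s =
        ufFold (ms.map (fun e => (e.1, e.2.1))) (unionA s e.1 e.2.1).1 := by
      rw [hmap]; rfl
    have hlen : (((e :: ms).length : Int)) = (ms.length : Int) + 1 := by simp
    cases hu : (unionA s e.1 e.2.1).2 with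
    | true =>
      have h2 := hTwo hu
      have hc' : c - 1 = (pvNR n (unionA s e.1 e.2.1).1 : Int) := by
        rw [hNR, if_pos hu, hc]
        push_cast [Nat.cast_sub (by omega : 1 ≤ pvNR n s)]
        ring
      obtain ⟨ihb, ihf⟩ := ih (unionA s e.1 e.2.1).1 (c - 1) hInv' hW' hc'
      rw [hFcons, hlen]
      constructor
      · have : c - ((ms.length : Int) + 1) = (c - 1) - ms.length := by ring
        rw [this]; exact ihb
      · rw [List.foldl_cons, hstep, if_pos (by rw [hu])]
        rw [ihf]
        have : c - ((ms.length : Int) + 1) = (c - 1) - ms.length := by ring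
        rw [this]
    | false =>
      have hc' : c = (pvNR n (unionA s e.1 e.2.1).1 : Int) := by
        rw [hNR, if_neg (by simp [hu]), hc]
      obtain ⟨ihb, _⟩ := ih (unionA s e.1 e.2.1).1 c hInv' hW' hc'
      rw [hFcons, hlen]
      constructor
      · have : c - ((ms.length : Int) + 1) ≤ c - ms.length := by omega
        exact le_trans this ihb
      · rw [List.foldl_cons, hstep, if_neg (by rw [hu]; simp), stepMA_none]
        rw [if_neg (by omega)]

theorem uaOne (n : Int) (hn0 : 0 ≤ n) : ∀ (es : List (Int × Int)) (s : List Int),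
    pvInv n s → pvNR n s = 1 → hWEdges n es →
    ∀ c : Int, (es.foldl stepU (s, c)).2 = c := by
  intro es
  induction es with
  | nil => intro s _ _ _ c; rfl
  | cons e es ih =>
    intro s hInv h1 hin c
    obtain ⟨hb2, hbInv, _, _, hbNR, _⟩ :=
      unionA_specW n s e.1 e.2 hInv hn0 (hin e (by simp)).1 (hin e (by simp)).2
    have hfalse : (unionA s e.1 e.2).2 = false := by
      cases hu : (unionA s e.1 e.2).2 with
      | false => rfl
      | true =>
        exact absurd (pvNR_one_roots_eq n s hInv h1 (pvNorm n e.1) (pvNorm n e.2)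
          (pvNorm_InR n e.1 (hin e (by simp)).1)
          (pvNorm_InR n e.2 (hin e (by simp)).2)) (hb2.1 hu)
    have hstep : stepU (s, c) e = ((unionA s e.1 e.2).1, c) := by
      simp [stepU, hfalse]
    rw [List.foldl_cons, hstep]
    apply ih _ hbInv _ (fun g hg => hin g (by simp [hg]))
    rw [hbNR, hfalse]
    simpa using h1

theorem baStuck (k : Int) : ∀ (es : List (Int × Int)) (st : List Int × Int × Int),
    (st.2.1 = 1 ∨ st.2.2 ≥ k) → es.foldl (stepBA k) st = st := by
  intro es
  induction es with
  | nil => intro st _; rfl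
  | cons e es ih =>
    intro st hst
    have hstep : stepBA k st e = st := by
      unfold stepBA
      rcases hst with h | h
      · rw [if_pos h]
      · by_cases h1 : st.2.1 = 1
        · rw [if_pos h1]
        · rw [if_neg h1, if_pos h]
    rw [List.foldl_cons, hstep]
    exact ih st hst

theorem goodLoop2 (n : Int) (hn0 : 0 ≤ n) :
    ∀ (es : List (Int × Int)) (sA sB : List Int) (comp : Int),
    pvRel n sA sB → hWEdges n es → comp = (pvNR n sA : Int) →
    (es.foldl stepGA (sA, comp)).2 = (es.foldl stepU (sB, comp)).2 ∧
    pvRel n (es.foldl stepGA (sA, comp)).1 (es.foldl stepU (sB, comp)).1 ∧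
    (es.foldl stepGA (sA, comp)).2 = (pvNR n (es.foldl stepGA (sA, comp)).1 : Int) := by
  intro es
  induction es with
  | nil => intro sA sB comp hRel _ hc; exact ⟨rfl, hRel, hc⟩
  | cons e es ih =>
    intro sA sB comp hRel hin hc
    by_cases hone : comp = 1
    · have hNR1 : pvNR n sA = 1 := by omega
      obtain ⟨hb2, hbInv, _, hbRoots, hbNR, _⟩ :=
        unionA_specW n sB e.1 e.2 hRel.2.1 hn0 (hin e (by simp)).1 (hin e (by simp)).2
      have hNRB1 : pvNR n sB = 1 := by rw [← pvRel_NR n sA sB hRel]; exact hNR1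
      have hfalse : (unionA sB e.1 e.2).2 = false := by
        cases hu : (unionA sB e.1 e.2).2 with
        | false => rfl
        | true =>
          exact absurd (pvNR_one_roots_eq n sB hRel.2.1 hNRB1 (pvNorm n e.1) (pvNorm n e.2)
            (pvNorm_InR n e.1 (hin e (by simp)).1)
            (pvNorm_InR n e.2 (hin e (by simp)).2)) (hb2.1 hu)
      have hstepA : stepGA (sA, comp) e = (sA, comp) := by simp [stepGA, hone]
      have hstepB : stepU (sB, comp) e = ((unionA sB e.1 e.2).1, comp) := by
        simp [stepU, hfalse]
      rw [List.foldl_cons, List.foldl_cons, hstepA, hstepB]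
      apply ih sA _ comp ?_ (fun g hg => hin g (by simp [hg])) hc
      refine ⟨hRel.1, hbInv, ?_⟩
      intro z hz
      rw [hbRoots z hz, hRel.2.2 z hz]
      have : pvRoot sB (pvNorm n e.1) = pvRoot sB (pvNorm n e.2) := by
        by_contra hne
        rw [hb2.2 hne] at hfalse
        exact Bool.true_eq_false.mp hfalse
      simp [this]
    · obtain ⟨hbb, hRel', hNR, hTwo⟩ :=
        pvUnion_pairAA n sA sB e.1 e.2 hRel hn0 (hin e (by simp)).1 (hin e (by simp)).2
      have hstepA : stepGA (sA, comp) e =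
          ((unionA sA e.1 e.2).1, if (unionA sA e.1 e.2).2 then comp - 1 else comp) := by
        simp [stepGA, hone]
      have hstepB : stepU (sB, comp) e =
          ((unionA sB e.1 e.2).1, if (unionA sB e.1 e.2).2 then comp - 1 else comp) := rfl
      rw [List.foldl_cons, List.foldl_cons, hstepA, hstepB, ← hbb]
      apply ih _ _ _ hRel' (fun g hg => hin g (by simp [hg]))
      cases hu : (unionA sA e.1 e.2).2 with
      | false => simpa [hu] using by rw [hNR, if_neg (by simp [hu])]; exact hc
      | true =>
        have := hTwo hu
        simp only [if_true]
        rw [hNR, if_pos hu, hc]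
        omega

theorem badLoop2 (n k : Int) (hn0 : 0 ≤ n) :
    ∀ (es : List (Int × Int)) (sA sB : List Int) (comp used : Int),
    pvRel n sA sB → hWEdges n es → comp = (pvNR n sA : Int) →
    ((es.foldl (stepBA k) (sA, comp, used)).2.1 = 1 ↔
      ((es.foldl stepU (sB, comp)).2 = 1 ∧ (comp = 1 ∨ k - used ≥ comp - 1))) := by
  intro es
  induction es with
  | nil =>
    intro sA sB comp used hRel _ hc
    constructor
    · intro h; exact ⟨h, Or.inl h⟩
    · intro h; exact h.1
  | cons e es ih =>
    intro sA sB comp used hRel hin hc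
    have hx := (hin e (by simp)).1
    have hy := (hin e (by simp)).2
    have hpos : 1 ≤ pvNR n sA := pvNR_pos n sA hRel.1 (pvNorm n e.1) (pvNorm_InR n e.1 hx)
    by_cases hone : comp = 1
    · -- A inert, B stays at 1
      have hA := baStuck k (e :: es) (sA, comp, used) (Or.inl hone)
      rw [hA]
      have hNR1 : pvNR n sA = 1 := by omega
      have hNRB1 : pvNR n sB = 1 := by rw [← pvRel_NR n sA sB hRel]; exact hNR1
      have hB := uaOne n hn0 (e :: es) sB hRel.2.1 hNRB1 hin comp
      rw [hB]
      simp [hone]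
    · by_cases hbud : used ≥ k
      · have hA := baStuck k (e :: es) (sA, comp, used) (Or.inr hbud)
        rw [hA]
        constructor
        · intro h; exact absurd h hone
        · intro ⟨_, hor⟩
          rcases hor with h | h
          · exact absurd h hone
          · exfalso; omega
      · obtain ⟨hbb, hRel', hNR, hTwo⟩ := pvUnion_pairAA n sA sB e.1 e.2 hRel hn0 hx hy
        have hstepA : stepBA k (sA, comp, used) e =
            (if (unionA sA e.1 e.2).2 then ((unionA sA e.1 e.2).1, comp - 1, used + 1)
             else ((unionA sA e.1 e.2).1, comp, used)) := by
          simp [stepBA, hone, hbud]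
        have hstepB : stepU (sB, comp) e =
            ((unionA sB e.1 e.2).1, if (unionA sB e.1 e.2).2 then comp - 1 else comp) := rfl
        rw [List.foldl_cons, List.foldl_cons, hstepA, hstepB, ← hbb]
        cases hu : (unionA sA e.1 e.2).2 with
        | false =>
          simp only [Bool.false_eq_true, if_false]
          have hc' : comp = (pvNR n (unionA sA e.1 e.2).1 : Int) := by
            rw [hNR, if_neg (by simp [hu])]; exact hc
          exact ih _ _ comp used hRel' (fun g hg => hin g (by simp [hg])) hc'
        | true =>
          simp only [if_true]
          have h2 := hTwo hu
          have hc' : comp - 1 = (pvNR n (unionA sA e.1 e.2).1 : Int) := by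
            rw [hNR, if_pos hu, hc]; omega
          have hih := ih _ _ (comp - 1) (used + 1) hRel' (fun g hg => hin g (by simp [hg])) hc'
          rw [hih]
          constructor
          · intro ⟨hcb, hor⟩
            refine ⟨hcb, Or.inr ?_⟩
            omega
          · intro ⟨hcb, hor⟩
            refine ⟨hcb, ?_⟩
            rcases hor with h | h
            · exact absurd h hone
            · omega

-- initial parent list

def pvInit (n : Int) : List Int := PySem.List.pyRange 0 n 1

theorem pvInit_len (n : Int) : (pvInit n).length = n.toNat := by
  simp [pvInit, PySem.List.length_pyRange_one]

theorem pvAt_init (n x : Int) (hx : pvInR n x) : pvAt (pvInit n) x = x := by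
  obtain ⟨h0, h1⟩ := hx
  simp [pvAt, pvInit, pysem, h0, h1]

theorem pvInv_init (n : Int) : pvInv n (pvInit n) := by
  refine ⟨pvInit_len n, ?_, ?_⟩
  · intro x hx; rw [pvAt_init n x hx]; exact hx
  · intro x hx
    exact ⟨0, by rw [pvIter_zero, pvAt_init n x hx]⟩

theorem pvNR_init (n : Int) : pvNR n (pvInit n) = n.toNat := by
  unfold pvNR
  rw [Finset.filter_true_of_mem, Finset.card_range]
  intro i hi
  exact pvAt_init n (i : Int) (pvInR_of_mem_range n i hi)

theorem pvRoot_init (n z : Int) (hz : pvInR n z) : pvRoot (pvInit n) z = z :=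
  (pvRoot_self_iff n _ (pvInv_init n) z hz).1 (pvAt_init n z hz)

-- ===== connectivity: the root partition of the ghost fold is the edge-connectivity relation =====

def ERel (n : Int) (es : List (Int × Int)) (x y : Int) : Prop :=
  ∃ e ∈ es, (pvNorm n e.1 = x ∧ pvNorm n e.2 = y) ∨ (pvNorm n e.1 = y ∧ pvNorm n e.2 = x)

def pvGen (n : Int) (s : List Int) (es : List (Int × Int)) (x y : Int) : Prop :=
  (pvInR n x ∧ pvInR n y ∧ pvRoot s x = pvRoot s y) ∨ ERel n es x y

theorem eqvGen_of_gen {r p : Int → Int → Prop}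
    (h : ∀ x y, r x y → Relation.EqvGen p x y) :
    ∀ x y, Relation.EqvGen r x y → Relation.EqvGen p x y := by
  intro x y hxy
  induction hxy with
  | rel a b hab => exact h a b hab
  | refl a => exact Relation.EqvGen.refl a
  | symm a b _ ih => exact Relation.EqvGen.symm _ _ ih
  | trans a b c _ _ ih1 ih2 => exact Relation.EqvGen.trans _ _ _ ih1 ih2

theorem ufConn_gen (n : Int) (hn0 : 0 ≤ n) : ∀ (es : List (Int × Int)) (s : List Int),
    pvInv n s → hWEdges n es →
    ∀ z w, pvInR n z → pvInR n w →
      (pvRoot (ufFold es s) z = pvRoot (ufFold es s) w ↔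
        Relation.EqvGen (pvGen n s es) z w) := by
  intro es
  induction es with
  | nil =>
    intro s hInv _ z w hz hw
    constructor
    · intro h
      exact Relation.EqvGen.rel z w (Or.inl ⟨hz, hw, h⟩)
    · intro h
      have aux : ∀ a b, Relation.EqvGen (pvGen n s []) a b →
          a = b ∨ (pvInR n a ∧ pvInR n b ∧ pvRoot s a = pvRoot s b) := by
        intro a b hab
        induction hab with
        | rel a b h =>
          rcases h with h | h
          · exact Or.inr h
          · rcases h with ⟨e, he, _⟩; simp at he
        | refl a => exact Or.inl rfl
        | symm a b _ ih =>
          rcases ih with rfl | ⟨h1, h2, h3⟩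
          · exact Or.inl rfl
          · exact Or.inr ⟨h2, h1, h3.symm⟩
        | trans a b c _ _ ih1 ih2 =>
          rcases ih1 with rfl | ⟨h1, h2, h3⟩
          · exact ih2
          · rcases ih2 with rfl | ⟨h4, h5, h6⟩
            · exact Or.inr ⟨h1, h2, h3⟩
            · exact Or.inr ⟨h1, h5, h3.trans h6⟩
      rcases aux z w h with rfl | ⟨_, _, h3⟩
      · rfl
      · exact h3
  | cons e es ih =>
    intro s hInv hW z w hz hw
    have he1 := (hW e (by simp)).1
    have he2 := (hW e (by simp)).2
    have hnaI : pvInR n (pvNorm n e.1) := pvNorm_InR n e.1 he1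
    have hnbI : pvInR n (pvNorm n e.2) := pvNorm_InR n e.2 he2
    obtain ⟨_, hInv', _, hup, _, _⟩ := unionA_specW n s e.1 e.2 hInv hn0 he1 he2
    have hW' : hWEdges n es := fun g hg => hW g (by simp [hg])
    have hcons : ufFold (e :: es) s = ufFold es (unionA s e.1 e.2).1 := rfl
    rw [hcons, ih (unionA s e.1 e.2).1 hInv' hW' z w hz hw]
    have hEe : ERel n (e :: es) (pvNorm n e.1) (pvNorm n e.2) :=
      ⟨e, by simp, Or.inl ⟨rfl, rfl⟩⟩
    have hchain : Relation.EqvGen (pvGen n s (e :: es)) (pvNorm n e.1) (pvNorm n e.2) :=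
      Relation.EqvGen.rel _ _ (Or.inr hEe)
    have base : ∀ a b, pvInR n a → pvInR n b → pvRoot s a = pvRoot s b →
        Relation.EqvGen (pvGen n s (e :: es)) a b :=
      fun a b ha hb h => Relation.EqvGen.rel _ _ (Or.inl ⟨ha, hb, h⟩)
    constructor
    · apply eqvGen_of_gen
      intro x y hxy
      rcases hxy with ⟨hxI, hyI, hxy⟩ | hE
      · rw [hup x hxI, hup y hyI] at hxy
        by_cases hcx : pvRoot s x = pvRoot s (pvNorm n e.2) ∧
            pvRoot s (pvNorm n e.1) ≠ pvRoot s (pvNorm n e.2)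
          <;> by_cases hcy : pvRoot s y = pvRoot s (pvNorm n e.2) ∧
            pvRoot s (pvNorm n e.1) ≠ pvRoot s (pvNorm n e.2)
        · rw [if_pos hcx, if_pos hcy] at hxy
          exact base x y hxI hyI (hcx.1.trans hcy.1.symm)
        · rw [if_pos hcx, if_neg hcy] at hxy
          refine Relation.EqvGen.trans _ _ _ (base x (pvNorm n e.2) hxI hnbI hcx.1) ?_
          refine Relation.EqvGen.trans _ _ _ (Relation.EqvGen.symm _ _ hchain) ?_
          exact base (pvNorm n e.1) y hnaI hyI hxy
        · rw [if_neg hcx, if_pos hcy] at hxy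
          refine Relation.EqvGen.trans _ _ _ (base x (pvNorm n e.1) hxI hnaI hxy) ?_
          refine Relation.EqvGen.trans _ _ _ hchain ?_
          exact base (pvNorm n e.2) y hnbI hyI hcy.1.symm
        · rw [if_neg hcx, if_neg hcy] at hxy
          exact base x y hxI hyI hxy
      · refine Relation.EqvGen.rel _ _ (Or.inr ?_)
        rcases hE with ⟨g, hg, hp⟩
        exact ⟨g, by simp [hg], hp⟩
    · apply eqvGen_of_gen
      intro x y hxy
      have hmap : ∀ a b, pvInR n a → pvInR n b → pvRoot s a = pvRoot s b →
          pvRoot (unionA s e.1 e.2).1 a = pvRoot (unionA s e.1 e.2).1 b := by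
        intro a b ha hb h
        rw [hup a ha, hup b hb, h]
      have hnn : pvRoot (unionA s e.1 e.2).1 (pvNorm n e.1) =
          pvRoot (unionA s e.1 e.2).1 (pvNorm n e.2) := by
        rw [hup _ hnaI, hup _ hnbI]
        by_cases hab : pvRoot s (pvNorm n e.1) = pvRoot s (pvNorm n e.2)
        · rw [if_neg (by simp [hab]), if_neg (by simp [hab])]
          exact hab
        · rw [if_neg (fun hc => hab hc.1), if_pos ⟨rfl, hab⟩]
      rcases hxy with ⟨hxI, hyI, hxy⟩ | ⟨g, hg, hp⟩
      · exact Relation.EqvGen.rel _ _ (Or.inl ⟨hxI, hyI, hmap x y hxI hyI hxy⟩)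
      · rcases List.mem_cons.1 hg with rfl | hg'
        · rcases hp with ⟨h1, h2⟩ | ⟨h1, h2⟩
          · rw [← h1, ← h2]
            exact Relation.EqvGen.rel _ _ (Or.inl ⟨hnaI, hnbI, hnn⟩)
          · rw [← h1, ← h2]
            exact Relation.EqvGen.rel _ _ (Or.inl ⟨hnbI, hnaI, hnn.symm⟩)
        · exact Relation.EqvGen.rel _ _ (Or.inr ⟨g, hg', hp⟩)

-- ===== generic Python list-cell access (adjacency lists, seen flags) =====

def pvG {α : Type} (d : α) (s : List α) (x : Int) : α := PySem.List.pyGetD s x d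

def pvS {α : Type} (s : List α) (x : Int) (v : α) : List α := PySem.List.pySetD s x v

theorem pvS_len {α : Type} (s : List α) (x : Int) (v : α) : (pvS s x v).length = s.length :=
  PySem.List.length_pySetD s x v

theorem pvG_wrap {α : Type} (d : α) (s : List α) (x : Int) (h0 : -s.length ≤ x) (h1 : x < 0) :
    pvG d s x = pvG d s (x + s.length) := by
  simp only [pvG, PySem.List.pyGetD, PySem.List.pyGet?]
  rw [pyIdx_wrap s.length x h0 h1]

theorem pvS_wrap {α : Type} (s : List α) (x : Int) (v : α) (h0 : -s.length ≤ x) (h1 : x < 0) :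
    pvS s x v = pvS s (x + s.length) v := by
  simp only [pvS, PySem.List.pySetD, PySem.List.pySet?]
  rw [pyIdx_wrap s.length x h0 h1]

theorem pvG_norm {α : Type} (d : α) (n : Int) (hn0 : 0 ≤ n) (s : List α)
    (hlen : s.length = n.toNat) (x : Int) (hx : pvW n x) :
    pvG d s x = pvG d s (pvNorm n x) := by
  obtain ⟨hx0, hx1⟩ := hx
  by_cases h : x < 0
  · have hle : -(s.length : Int) ≤ x := by rw [hlen]; omega
    rw [pvNorm, if_pos h, pvG_wrap d s x hle h, hlen]
    congr 1
    omega
  · rw [pvNorm, if_neg h]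

theorem pvS_norm {α : Type} (n : Int) (hn0 : 0 ≤ n) (s : List α)
    (hlen : s.length = n.toNat) (x : Int) (hx : pvW n x) (v : α) :
    pvS s x v = pvS s (pvNorm n x) v := by
  obtain ⟨hx0, hx1⟩ := hx
  by_cases h : x < 0
  · have hle : -(s.length : Int) ≤ x := by rw [hlen]; omega
    rw [pvNorm, if_pos h, pvS_wrap s x v hle h, hlen]
    congr 1
    omega
  · rw [pvNorm, if_neg h]

theorem pvG_nonneg {α : Type} (d : α) (s : List α) (x : Int) (h : 0 ≤ x) :
    pvG d s x = s.getD x.toNat d := PySem.List.pyGetD_of_nonneg s d h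

theorem pvS_nonneg {α : Type} (s : List α) (x : Int) (v : α) (h : 0 ≤ x) :
    pvS s x v = s.set x.toNat v := PySem.List.pySetD_of_nonneg s v h

theorem pvG_pvS_point {α : Type} (d : α) (n : Int) (s : List α) (hlen : s.length = n.toNat)
    (a b : Int) (ha : pvInR n a) (hb : pvInR n b) (v : α) :
    pvG d (pvS s a v) b = if b = a then v else pvG d s b := by
  obtain ⟨ha0, ha1⟩ := ha
  obtain ⟨hb0, hb1⟩ := hb
  rw [pvS_nonneg s a v ha0, pvG_nonneg d _ b hb0, pvG_nonneg d s b hb0]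
  have hat : a.toNat < s.length := by rw [hlen]; omega
  by_cases hba : b = a
  · subst hba
    simp [List.getD, List.getElem?_set_self, hat]
  · rw [if_neg hba]
    simp only [List.getD]
    rw [List.getElem?_set_ne (by omega)]

-- ===== adjacency characterization =====

theorem pvBuildAdj_foldlen (es : List (Int × Int)) : ∀ (adj : List (List Int)),
    (es.foldl (fun adj e =>
        let adj1 := PySem.List.pySetD adj e.1 (PySem.List.pyGetD adj e.1 [] ++ [e.2])
        PySem.List.pySetD adj1 e.2 (PySem.List.pyGetD adj1 e.2 [] ++ [e.1])) adj).length
      = adj.length := by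
  induction es with
  | nil => intro adj; rfl
  | cons e es ih =>
    intro adj
    rw [List.foldl_cons, ih]
    simp [PySem.List.length_pySetD]

theorem pvBuildAdj_len (n : Int) (es : List (Int × Int)) :
    (pvBuildAdj n es).length = n.toNat := by
  unfold pvBuildAdj
  rw [pvBuildAdj_foldlen]
  simp [PySem.List.length_pyRange_one]

theorem pvAdjMem (n : Int) (hn0 : 0 ≤ n) (es : List (Int × Int)) (hW : hWEdges n es)
    (j : Int) (hj : pvInR n j) (y : Int) :
    y ∈ pvG [] (pvBuildAdj n es) j ↔
      ∃ e ∈ es, (pvNorm n e.1 = j ∧ e.2 = y) ∨ (pvNorm n e.2 = j ∧ e.1 = y) := by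
  have main : ∀ (es : List (Int × Int)) (adj : List (List Int)),
      adj.length = n.toNat → hWEdges n es →
      ∀ (j : Int), pvInR n j → ∀ (y : Int),
      (y ∈ pvG [] (es.foldl (fun adj e =>
          let adj1 := PySem.List.pySetD adj e.1 (PySem.List.pyGetD adj e.1 [] ++ [e.2])
          PySem.List.pySetD adj1 e.2 (PySem.List.pyGetD adj1 e.2 [] ++ [e.1])) adj) j ↔
        y ∈ pvG [] adj j ∨
          ∃ e ∈ es, (pvNorm n e.1 = j ∧ e.2 = y) ∨ (pvNorm n e.2 = j ∧ e.1 = y)) := by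
    intro es
    induction es with
    | nil => intro adj _ _ j hj y; simp
    | cons e es ih =>
      intro adj hlen hW j hj y
      have he1 := (hW e (by simp)).1
      have he2 := (hW e (by simp)).2
      have hn1 : pvInR n (pvNorm n e.1) := pvNorm_InR n e.1 he1
      have hn2 : pvInR n (pvNorm n e.2) := pvNorm_InR n e.2 he2
      rw [List.foldl_cons]
      have hG1 : PySem.List.pyGetD adj e.1 [] = pvG [] adj (pvNorm n e.1) :=
        pvG_norm [] n hn0 adj hlen e.1 he1
      have hS1 : PySem.List.pySetD adj e.1 (PySem.List.pyGetD adj e.1 [] ++ [e.2]) =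
          pvS adj (pvNorm n e.1) (pvG [] adj (pvNorm n e.1) ++ [e.2]) := by
        rw [hG1]
        exact pvS_norm n hn0 adj hlen e.1 he1 _
      set adj1 := pvS adj (pvNorm n e.1) (pvG [] adj (pvNorm n e.1) ++ [e.2]) with hadj1
      have hlen1 : adj1.length = n.toNat := by rw [hadj1, pvS_len, hlen]
      have hG2 : PySem.List.pyGetD adj1 e.2 [] = pvG [] adj1 (pvNorm n e.2) :=
        pvG_norm [] n hn0 adj1 hlen1 e.2 he2
      have hS2 : PySem.List.pySetD adj1 e.2 (PySem.List.pyGetD adj1 e.2 [] ++ [e.1]) =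
          pvS adj1 (pvNorm n e.2) (pvG [] adj1 (pvNorm n e.2) ++ [e.1]) := by
        rw [hG2]
        exact pvS_norm n hn0 adj1 hlen1 e.2 he2 _
      set adj2 := pvS adj1 (pvNorm n e.2) (pvG [] adj1 (pvNorm n e.2) ++ [e.1]) with hadj2
      have hlen2 : adj2.length = n.toNat := by rw [hadj2, pvS_len, hlen1]
      simp only [List.foldl_cons]
      rw [hS1, hS2]
      rw [ih adj2 hlen2 (fun g hg => hW g (by simp [hg])) j hj y]
      have hcell1 : ∀ (b : Int), pvInR n b →
          pvG [] adj1 b = if b = pvNorm n e.1 then pvG [] adj (pvNorm n e.1) ++ [e.2]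
            else pvG [] adj b := by
        intro b hb
        rw [hadj1]
        exact pvG_pvS_point [] n adj hlen (pvNorm n e.1) b hn1 hb _
      have hcell2 : ∀ (b : Int), pvInR n b →
          pvG [] adj2 b = if b = pvNorm n e.2 then pvG [] adj1 (pvNorm n e.2) ++ [e.1]
            else pvG [] adj1 b := by
        intro b hb
        rw [hadj2]
        exact pvG_pvS_point [] n adj1 hlen1 (pvNorm n e.2) b hn2 hb _
      have hmem : y ∈ pvG [] adj2 j ↔
          (y ∈ pvG [] adj j ∨ (pvNorm n e.1 = j ∧ e.2 = y) ∨ (pvNorm n e.2 = j ∧ e.1 = y)) := by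
        rw [hcell2 j hj]
        by_cases hj2 : j = pvNorm n e.2
        · rw [if_pos hj2, hcell1 (pvNorm n e.2) hn2]
          by_cases h12 : pvNorm n e.2 = pvNorm n e.1
          · rw [if_pos h12]
            subst hj2
            simp [List.mem_append, h12, eq_comm]
          · rw [if_neg h12]
            subst hj2
            simp [List.mem_append, eq_comm]
            all_goals tauto
        · rw [if_neg hj2, hcell1 j hj]
          by_cases hj1 : j = pvNorm n e.1
          · rw [if_pos hj1]
            subst hj1
            simp [List.mem_append, eq_comm]
            all_goals tauto
          · rw [if_neg hj1]
            constructor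
            · intro h; exact Or.inl h
            · intro h
              rcases h with h | h | h
              · exact h
              · exact absurd h.1.symm hj1
              · exact absurd h.1.symm hj2
      rw [hmem]
      constructor
      · intro h
        rcases h with (h | h | h) | ⟨g, hg, hp⟩
        · exact Or.inl h
        · exact Or.inr ⟨e, by simp, Or.inl h⟩
        · exact Or.inr ⟨e, by simp, Or.inr h⟩
        · exact Or.inr ⟨g, by simp [hg], hp⟩
      · intro h
        rcases h with h | ⟨g, hg, hp⟩
        · exact Or.inl (Or.inl h)
        · rcases List.mem_cons.1 hg with rfl | hg'
          · rcases hp with hp | hp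
            · exact Or.inl (Or.inr (Or.inl hp))
            · exact Or.inl (Or.inr (Or.inr hp))
          · exact Or.inr ⟨g, hg', hp⟩
  have h0 : ((PySem.List.pyRange 0 n 1).map (fun _ => ([] : List Int))).length = n.toNat := by
    simp [PySem.List.length_pyRange_one]
  have := main es ((PySem.List.pyRange 0 n 1).map (fun _ => ([] : List Int))) h0 hW j hj y
  rw [pvBuildAdj, this]
  have hnil : pvG [] ((PySem.List.pyRange 0 n 1).map (fun _ => ([] : List Int))) j = [] := by
    have hj0 := hj.1
    have hj1 := hj.2
    rw [pvG_nonneg _ _ j hj0]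
    have hlt : j.toNat < (PySem.List.pyRange 0 n 1).length := by
      rw [PySem.List.length_pyRange_one]
      omega
    rw [List.getD_eq_getElem?_getD, List.getElem?_map, List.getElem?_eq_getElem hlt]
    simp
  rw [hnil]
  simp

-- ===== the DFS loop =====

def Mk (seen : List Bool) (j : Int) : Prop := pvG true seen j = true

theorem foldNb_spec (n : Int) (hn0 : 0 ≤ n) :
    ∀ (L : List Int) (seen : List Bool) (stk : List Int),
      seen.length = n.toNat → (∀ y ∈ L, pvW n y) →
      (L.foldl dfsNb (seen, stk)).1.length = n.toNat ∧
      (∀ j, pvInR n j → Mk seen j → Mk (L.foldl dfsNb (seen, stk)).1 j) ∧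
      (∀ j, pvInR n j → Mk (L.foldl dfsNb (seen, stk)).1 j →
        Mk seen j ∨ ∃ y ∈ L, pvNorm n y = j) ∧
      (∀ y ∈ L, Mk (L.foldl dfsNb (seen, stk)).1 (pvNorm n y)) ∧
      (∀ t ∈ stk, t ∈ (L.foldl dfsNb (seen, stk)).2) ∧
      (∀ t ∈ (L.foldl dfsNb (seen, stk)).2, t ∈ stk ∨ t ∈ L) ∧
      (∀ j, pvInR n j → ¬ Mk seen j → Mk (L.foldl dfsNb (seen, stk)).1 j →
        ∃ t ∈ (L.foldl dfsNb (seen, stk)).2, pvNorm n t = j) := by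
  intro L
  induction L with
  | nil =>
    intro seen stk hlen _
    exact ⟨hlen, fun j _ h => h, fun j _ h => Or.inl h, by simp, fun t ht => ht,
      fun t ht => Or.inl ht, fun j _ hns hm => absurd hm hns⟩
  | cons y L ih =>
    intro seen stk hlen hWL
    have hy : pvW n y := hWL y (by simp)
    have hyI : pvInR n (pvNorm n y) := pvNorm_InR n y hy
    have hWL' : ∀ g ∈ L, pvW n g := fun g hg => hWL g (by simp [hg])
    rw [List.foldl_cons]
    by_cases hcond : PySem.List.pyGetD seen y true = false
    · have hstep : dfsNb (seen, stk) y = (PySem.List.pySetD seen y true, stk ++ [y]) := by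
        simp [dfsNb, hcond]
      rw [hstep]
      have hset : PySem.List.pySetD seen y true = pvS seen (pvNorm n y) true :=
        pvS_norm n hn0 seen hlen y hy true
      have hlen' : (PySem.List.pySetD seen y true).length = n.toNat := by
        rw [show (PySem.List.pySetD seen y true) = pvS seen y true from rfl, pvS_len, hlen]
      have hMk' : ∀ j, pvInR n j →
          (Mk (PySem.List.pySetD seen y true) j ↔ (j = pvNorm n y ∨ Mk seen j)) := by
        intro j hj
        rw [Mk, hset, pvG_pvS_point true n seen hlen (pvNorm n y) j hyI hj]
        by_cases hjy : j = pvNorm n y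
        · simp [hjy]
        · simp [hjy, Mk]
      obtain ⟨c1, c2, c3, c4, c5, c6, c7⟩ := ih (PySem.List.pySetD seen y true) (stk ++ [y]) hlen' hWL'
      refine ⟨c1, ?_, ?_, ?_, ?_, ?_, ?_⟩
      · intro j hj hm
        exact c2 j hj ((hMk' j hj).2 (Or.inr hm))
      · intro j hj hm
        rcases c3 j hj hm with hm' | ⟨g, hg, hgj⟩
        · rcases (hMk' j hj).1 hm' with rfl | hm''
          · exact Or.inr ⟨y, by simp⟩
          · exact Or.inl hm''
        · exact Or.inr ⟨g, by simp [hg], hgj⟩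
      · intro g hg
        rcases List.mem_cons.1 hg with rfl | hg'
        · exact c2 _ hyI ((hMk' _ hyI).2 (Or.inl rfl))
        · exact c4 g hg'
      · intro t ht
        exact c5 t (by simp [ht])
      · intro t ht
        rcases c6 t ht with ht' | ht'
        · rcases List.mem_append.1 ht' with h | h
          · exact Or.inl h
          · simp at h; subst h; exact Or.inr (by simp)
        · exact Or.inr (by simp [ht'])
      · intro j hj hns hm
        by_cases hjy : j = pvNorm n y
        · subst hjy
          exact ⟨y, c5 y (by simp), rfl⟩
        · have hns' : ¬ Mk (PySem.List.pySetD seen y true) j := by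
            rw [hMk' j hj]
            rintro (h | h)
            · exact hjy h
            · exact hns h
          exact c7 j hj hns' hm
    · have hstep : dfsNb (seen, stk) y = (seen, stk) := by simp [dfsNb, hcond]
      rw [hstep]
      have hMkY : Mk seen (pvNorm n y) := by
        have htrue : PySem.List.pyGetD seen y true = true := by
          cases hb : PySem.List.pyGetD seen y true
          · exact absurd hb hcond
          · rfl
        rw [Mk, ← pvG_norm true n hn0 seen hlen y hy]
        exact htrue
      obtain ⟨c1, c2, c3, c4, c5, c6, c7⟩ := ih seen stk hlen hWL'
      refine ⟨c1, c2, ?_, ?_, c5, ?_, c7⟩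
      · intro j hj hm
        rcases c3 j hj hm with h | ⟨g, hg, hgj⟩
        · exact Or.inl h
        · exact Or.inr ⟨g, by simp [hg], hgj⟩
      · intro g hg
        rcases List.mem_cons.1 hg with rfl | hg'
        · exact c2 _ hyI hMkY
        · exact c4 g hg'
      · intro t ht
        rcases c6 t ht with h | h
        · exact Or.inl h
        · exact Or.inr (by simp [h])

theorem dfs_spec (n : Int) (hn0 : 0 ≤ n) (adj : List (List Int)) (halen : adj.length = n.toNat)
    (G : Int → Prop)
    (hAdjW : ∀ j y, pvInR n j → y ∈ pvG [] adj j → pvW n y)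
    (hGstep : ∀ j y, pvInR n j → y ∈ pvG [] adj j → G j → G (pvNorm n y)) :
    ∀ (seen : List Bool) (stack : List Int),
      seen.length = n.toNat →
      (∀ t ∈ stack, pvW n t ∧ Mk seen (pvNorm n t)) →
      (∀ j, pvInR n j → Mk seen j → G j) →
      (∀ j, pvInR n j → Mk seen j →
        (∃ t ∈ stack, pvNorm n t = j) ∨ ∀ y ∈ pvG [] adj j, Mk seen (pvNorm n y)) →
      (dfsLoop adj seen stack).length = n.toNat ∧
      (∀ j, pvInR n j → Mk seen j → Mk (dfsLoop adj seen stack) j) ∧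
      (∀ j, pvInR n j → Mk (dfsLoop adj seen stack) j → G j) ∧
      (∀ j, pvInR n j → Mk (dfsLoop adj seen stack) j →
        ∀ y ∈ pvG [] adj j, Mk (dfsLoop adj seen stack) (pvNorm n y)) := by
  intro seen stack
  induction seen, stack using dfsLoop.induct adj with
  | case1 seen =>
    intro hlen hstk hG hfront
    rw [dfsLoop, dif_pos rfl]
    refine ⟨hlen, fun j _ h => h, hG, ?_⟩
    intro j hj hm y hy
    rcases hfront j hj hm with ⟨t, ht, _⟩ | hcl
    · simp at ht
    · exact hcl y hy
  | case2 seen stack hemp hxv hstv ihrec =>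
    intro hlen hstk hG hfront
    have hxmem : stack.getLast hemp ∈ stack := List.getLast_mem hemp
    obtain ⟨hxW, hxMk⟩ := hstk _ hxmem
    have hxI : pvInR n (pvNorm n (stack.getLast hemp)) := pvNorm_InR n _ hxW
    have hcell : PySem.List.pyGetD adj (stack.getLast hemp) [] =
        pvG [] adj (pvNorm n (stack.getLast hemp)) :=
      pvG_norm [] n hn0 adj halen (stack.getLast hemp) hxW
    have hLW : ∀ y ∈ PySem.List.pyGetD adj (stack.getLast hemp) [], pvW n y := by
      intro y hy
      rw [hcell] at hy
      exact hAdjW _ y hxI hy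
    obtain ⟨c1, c2, c3, c4, c5, c6, c7⟩ :=
      foldNb_spec n hn0 (PySem.List.pyGetD adj (stack.getLast hemp) []) seen stack.dropLast
        hlen hLW
    set p := (PySem.List.pyGetD adj (stack.getLast hemp) []).foldl dfsNb (seen, stack.dropLast)
      with hp
    have hGx : G (pvNorm n (stack.getLast hemp)) := hG _ hxI hxMk
    -- hypotheses for the recursive call
    have hstk' : ∀ t ∈ p.2, pvW n t ∧ Mk p.1 (pvNorm n t) := by
      intro t ht
      rcases c6 t ht with ht' | ht'
      · have hts : t ∈ stack := (List.dropLast_sublist (l := stack)).subset ht'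
        obtain ⟨htW, htMk⟩ := hstk t hts
        exact ⟨htW, c2 _ (pvNorm_InR n t htW) htMk⟩
      · have htW : pvW n t := hLW t ht'
        exact ⟨htW, c4 t ht'⟩
    have hG' : ∀ j, pvInR n j → Mk p.1 j → G j := by
      intro j hj hm
      rcases c3 j hj hm with hm' | ⟨g, hg, hgj⟩
      · exact hG j hj hm'
      · rw [← hgj]
        rw [hcell] at hg
        exact hGstep _ g hxI hg hGx
    have hfront' : ∀ j, pvInR n j → Mk p.1 j →
        (∃ t ∈ p.2, pvNorm n t = j) ∨ ∀ y ∈ pvG [] adj j, Mk p.1 (pvNorm n y) := by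
      intro j hj hm
      by_cases hms : Mk seen j
      · rcases hfront j hj hms with ⟨t, ht, htj⟩ | hcl
        · rw [← List.dropLast_concat_getLast hemp, List.mem_append] at ht
          rcases ht with ht | ht
          · exact Or.inl ⟨t, c5 t ht, htj⟩
          · simp at ht
            subst ht
            right
            intro y hy
            rw [htj] at hcell
            rw [← hcell] at hy
            exact c4 y hy
        · right
          intro y hy
          exact c2 _ (pvNorm_InR n y (hAdjW j y hj hy)) (hcl y hy)
      · exact Or.inl (c7 j hj hms hm)
    obtain ⟨d1, d2, d3, d4⟩ := ihrec c1 hstk' hG' hfront'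
    have hrw : dfsLoop adj seen stack = dfsLoop adj p.1 p.2 := by
      rw [dfsLoop]
      rw [dif_neg hemp]
    rw [hrw]
    refine ⟨d1, ?_, d3, d4⟩
    intro j hj hm
    exact d2 j hj (c2 j hj hm)

-- ===== component counting =====

def pvMinima (n : Int) (F : List Int) (t : Int) : Finset ℕ :=
  (Finset.range n.toNat).filter
    (fun i => (i : Int) < t ∧ ∀ i' < i, pvRoot F (i' : Int) ≠ pvRoot F (i : Int))

theorem pvRoot_root (n : Int) (F : List Int) (hInvF : pvInv n F) (x : Int) (hx : pvInR n x) :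
    pvRoot F (pvRoot F x) = pvRoot F x :=
  (pvRoot_self_iff n F hInvF (pvRoot F x) (pvRoot_InR n F hInvF x hx)).1
    (pvRoot_fix n F hInvF x hx)

theorem minima_card_eq_NR (n : Int) (hn0 : 0 ≤ n) (F : List Int) (hInvF : pvInv n F) :
    (pvMinima n F n).card = pvNR n F := by
  classical
  have hne : ∀ b ∈ (Finset.range n.toNat).filter (fun i : Nat => pvAt F (i:Int) = (i:Int)),
      ((Finset.range n.toNat).filter
        (fun i : Nat => pvRoot F (i:Int) = pvRoot F (b:Int))).Nonempty := by
    intro b hb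
    simp only [Finset.mem_filter] at hb
    exact ⟨b, by simp [Finset.mem_filter, hb.1]⟩
  unfold pvMinima pvNR
  apply Finset.card_bij'
    (i := fun (a : ℕ) (_ : a ∈ (Finset.range n.toNat).filter
        (fun i : Nat => (i : Int) < n ∧ ∀ i' < i, pvRoot F (i':Int) ≠ pvRoot F (i:Int))) =>
      (pvRoot F (a : Int)).toNat)
    (j := fun (b : ℕ) (hb : b ∈ (Finset.range n.toNat).filter
        (fun i : Nat => pvAt F (i:Int) = (i:Int))) =>
      ((Finset.range n.toNat).filter
        (fun i : Nat => pvRoot F (i:Int) = pvRoot F (b:Int))).min' (hne b hb))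
  case hi =>
    intro a ha
    simp only [Finset.mem_filter, Finset.mem_range] at ha ⊢
    have haI : pvInR n (a : Int) := ⟨by omega, by omega⟩
    have hrI : pvInR n (pvRoot F (a : Int)) := pvRoot_InR n F hInvF _ haI
    have hcast : (((pvRoot F (a : Int)).toNat : ℕ) : Int) = pvRoot F (a : Int) :=
      Int.toNat_of_nonneg hrI.1
    have hr1 := hrI.1
    have hr2 := hrI.2
    refine ⟨by omega, ?_⟩
    rw [hcast]
    exact pvRoot_fix n F hInvF _ haI
  case hj =>
    intro b hb
    have hm := Finset.min'_mem _ (hne b hb)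
    set m := ((Finset.range n.toNat).filter
      (fun i : Nat => pvRoot F (i:Int) = pvRoot F (b:Int))).min' (hne b hb) with hmdef
    simp only [Finset.mem_filter, Finset.mem_range] at hm
    simp only [Finset.mem_filter, Finset.mem_range]
    refine ⟨hm.1, by omega, ?_⟩
    intro i' hi' hcontra
    have hi'mem : i' ∈ (Finset.range n.toNat).filter
        (fun i : Nat => pvRoot F (i:Int) = pvRoot F (b:Int)) := by
      simp only [Finset.mem_filter, Finset.mem_range]
      exact ⟨by omega, by rw [hcontra, hm.2]⟩
    have := Finset.min'_le _ _ hi'mem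
    omega
  case left_inv =>
    intro a ha
    simp only [Finset.mem_filter, Finset.mem_range] at ha
    obtain ⟨haR, _, hamin⟩ := ha
    have haI : pvInR n (a : Int) := ⟨by omega, by omega⟩
    have hrI : pvInR n (pvRoot F (a : Int)) := pvRoot_InR n F hInvF _ haI
    have hcast : (((pvRoot F (a : Int)).toNat : ℕ) : Int) = pvRoot F (a : Int) :=
      Int.toNat_of_nonneg hrI.1
    have hroots2 : pvRoot F ((((pvRoot F (a : Int)).toNat : ℕ)) : Int) = pvRoot F (a : Int) := by
      rw [hcast]
      exact pvRoot_root n F hInvF _ haI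
    have hamem : a ∈ (Finset.range n.toNat).filter
        (fun i : Nat => pvRoot F (i:Int) = pvRoot F (((pvRoot F (a : Int)).toNat : ℕ) : Int)) := by
      simp only [Finset.mem_filter, Finset.mem_range]
      exact ⟨haR, hroots2.symm⟩
    apply le_antisymm
    · exact Finset.min'_le _ _ hamem
    · apply Finset.le_min'
      intro m hmm
      simp only [Finset.mem_filter, Finset.mem_range] at hmm
      rw [hroots2] at hmm
      by_contra hlt
      exact hamin m (by omega) hmm.2
  case right_inv =>
    intro b hb
    have hbmem := hb
    simp only [Finset.mem_filter, Finset.mem_range] at hbmem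
    have hbI : pvInR n (b : Int) := ⟨by omega, by omega⟩
    have hbroot : pvRoot F (b : Int) = (b : Int) :=
      (pvRoot_self_iff n F hInvF _ hbI).1 hbmem.2
    have hm := Finset.min'_mem _ (hne b hb)
    simp only [Finset.mem_filter, Finset.mem_range] at hm
    rw [hm.2, hbroot]
    omega

theorem adj_to_ERel (n : Int) (hn0 : 0 ≤ n) (es : List (Int × Int)) (hW : hWEdges n es)
    (j y : Int) (hj : pvInR n j) (hy : y ∈ pvG [] (pvBuildAdj n es) j) :
    pvW n y ∧ ERel n es j (pvNorm n y) := by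
  rcases (pvAdjMem n hn0 es hW j hj y).1 hy with ⟨e, he, ⟨h1, h2⟩ | ⟨h1, h2⟩⟩
  · subst h2
    exact ⟨(hW e he).2, ⟨e, he, Or.inl ⟨h1, rfl⟩⟩⟩
  · subst h2
    exact ⟨(hW e he).1, ⟨e, he, Or.inr ⟨rfl, h1⟩⟩⟩

theorem ERel_to_adj (n : Int) (hn0 : 0 ≤ n) (es : List (Int × Int)) (hW : hWEdges n es)
    (a b : Int) (ha : pvInR n a) (hb : pvInR n b) (hE : ERel n es a b) :
    (∃ y ∈ pvG [] (pvBuildAdj n es) a, pvNorm n y = b) ∧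
    (∃ y ∈ pvG [] (pvBuildAdj n es) b, pvNorm n y = a) := by
  rcases hE with ⟨e, he, ⟨h1, h2⟩ | ⟨h1, h2⟩⟩
  · constructor
    · exact ⟨e.2, (pvAdjMem n hn0 es hW a ha e.2).2 ⟨e, he, Or.inl ⟨h1, rfl⟩⟩, h2⟩
    · exact ⟨e.1, (pvAdjMem n hn0 es hW b hb e.1).2 ⟨e, he, Or.inr ⟨h2, rfl⟩⟩, h1⟩
  · constructor
    · exact ⟨e.1, (pvAdjMem n hn0 es hW a ha e.1).2 ⟨e, he, Or.inr ⟨h2, rfl⟩⟩, h1⟩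
    · exact ⟨e.2, (pvAdjMem n hn0 es hW b hb e.2).2 ⟨e, he, Or.inl ⟨h1, rfl⟩⟩, h2⟩

theorem ERel_InR (n : Int) (es : List (Int × Int)) (hW : hWEdges n es) (a b : Int)
    (hE : ERel n es a b) : pvInR n a ∧ pvInR n b := by
  rcases hE with ⟨e, he, ⟨h1, h2⟩ | ⟨h1, h2⟩⟩
  · rw [← h1, ← h2]
    exact ⟨pvNorm_InR n e.1 (hW e he).1, pvNorm_InR n e.2 (hW e he).2⟩
  · rw [← h1, ← h2]
    exact ⟨pvNorm_InR n e.2 (hW e he).2, pvNorm_InR n e.1 (hW e he).1⟩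

theorem eqvGen_marked (n : Int) (hn0 : 0 ≤ n) (es : List (Int × Int)) (hW : hWEdges n es)
    (P : Int → Prop)
    (hstep : ∀ j y, pvInR n j → y ∈ pvG [] (pvBuildAdj n es) j → P j → P (pvNorm n y)) :
    ∀ a b, Relation.EqvGen (pvGen n (pvInit n) es) a b →
      a = b ∨ (pvInR n a ∧ pvInR n b ∧ (P a ↔ P b)) := by
  intro a b hab
  induction hab with
  | rel a b h =>
    rcases h with ⟨ha, hb, hroots⟩ | hE
    · rw [pvRoot_init n a ha, pvRoot_init n b hb] at hroots
      exact Or.inl hroots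
    · obtain ⟨haI, hbI⟩ := ERel_InR n es hW a b hE
      obtain ⟨⟨y1, hy1, hy1b⟩, ⟨y2, hy2, hy2a⟩⟩ := ERel_to_adj n hn0 es hW a b haI hbI hE
      refine Or.inr ⟨haI, hbI, ?_, ?_⟩
      · intro hPa
        rw [← hy1b]
        exact hstep a y1 haI hy1 hPa
      · intro hPb
        rw [← hy2a]
        exact hstep b y2 hbI hy2 hPb
  | refl a => exact Or.inl rfl
  | symm a b _ ih =>
    rcases ih with rfl | ⟨h1, h2, h3⟩
    · exact Or.inl rfl
    · exact Or.inr ⟨h2, h1, h3.symm⟩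
  | trans a b c _ _ ih1 ih2 =>
    rcases ih1 with rfl | ⟨h1, h2, h3⟩
    · exact ih2
    · rcases ih2 with rfl | ⟨h4, h5, h6⟩
      · exact Or.inr ⟨h1, h2, h3⟩
      · exact Or.inr ⟨h1, h5, h3.trans h6⟩

theorem compLoop (n : Int) (hn0 : 0 ≤ n) (es : List (Int × Int)) (hW : hWEdges n es) :
    ∀ (fuel : Nat) (t : Int), 0 ≤ t → t ≤ n → (n - t).toNat ≤ fuel →
    ∀ (count : Int) (seen : List Bool),
      seen.length = n.toNat →
      (∀ j, pvInR n j → (Mk seen j ↔ ∃ s0 : Int, 0 ≤ s0 ∧ s0 < t ∧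
          pvRoot (ufFold es (pvInit n)) s0 = pvRoot (ufFold es (pvInit n)) j)) →
      (∀ j, pvInR n j → Mk seen j →
          ∀ y ∈ pvG [] (pvBuildAdj n es) j, Mk seen (pvNorm n y)) →
      count = ((pvMinima n (ufFold es (pvInit n)) t).card : Int) →
      ((PySem.List.pyRange t n 1).foldl
        (fun (p : Int × List Bool) s =>
          if PySem.List.pyGetD p.2 s true = false then
            (p.1 + 1, dfsLoop (pvBuildAdj n es) (PySem.List.pySetD p.2 s true) [s])
          else p) (count, seen)).1
        = ((pvMinima n (ufFold es (pvInit n)) n).card : Int) := by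
  intro fuel
  induction fuel with
  | zero =>
    intro t ht0 htn hfuel count seen _ _ _ hcount
    have htn' : t = n := by omega
    subst htn'
    rw [PySem.List.pyRange_one_eq_nil le_rfl]
    simpa using hcount
  | succ fuel ih =>
    intro t ht0 htn hfuel count seen hlen hchar hclosed hcount
    by_cases hlt : t < n
    · rw [PySem.List.pyRange_one_cons hlt, List.foldl_cons]
      have htI : pvInR n t := ⟨ht0, hlt⟩
      have hnormt : pvNorm n t = t := by rw [pvNorm, if_neg (by omega)]
      by_cases hMk : Mk seen t
      · have hcond : ¬ (PySem.List.pyGetD seen t true = false) := by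
          have : pvG true seen t = true := hMk
          rw [show PySem.List.pyGetD seen t true = pvG true seen t from rfl, this]
          simp
        have hstep : (if PySem.List.pyGetD (count, seen).2 t true = false then
              ((count, seen).1 + 1,
                dfsLoop (pvBuildAdj n es) (PySem.List.pySetD (count, seen).2 t true) [t])
            else (count, seen)) = (count, seen) := by
          simp only
          rw [if_neg hcond]
        rw [hstep]
        apply ih (t+1) (by omega) (by omega) (by omega) count seen hlen ?_ hclosed ?_
        · intro j hj
          rw [hchar j hj]
          constructor
          · rintro ⟨s0, h0, h1, h2⟩
            exact ⟨s0, h0, by omega, h2⟩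
          · rintro ⟨s0, h0, h1, h2⟩
            by_cases hs0 : s0 < t
            · exact ⟨s0, h0, hs0, h2⟩
            · have hs0t : s0 = t := by omega
              rw [hs0t] at h2
              obtain ⟨s1, k0, k1, k2⟩ := (hchar t htI).1 hMk
              exact ⟨s1, k0, k1, k2.trans h2⟩
        · have hsets : pvMinima n (ufFold es (pvInit n)) (t+1)
              = pvMinima n (ufFold es (pvInit n)) t := by
            unfold pvMinima
            ext i
            simp only [Finset.mem_filter, Finset.mem_range]
            constructor
            · rintro ⟨hiR, hil, himin⟩
              refine ⟨hiR, ?_, himin⟩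
              by_contra hnl
              have hit : (i : Int) = t := by omega
              obtain ⟨s1, k0, k1, k2⟩ := (hchar t htI).1 hMk
              have : pvRoot (ufFold es (pvInit n)) ((s1.toNat : ℕ) : Int)
                  = pvRoot (ufFold es (pvInit n)) (i : Int) := by
                rw [Int.toNat_of_nonneg k0, hit]
                exact k2
              exact himin s1.toNat (by omega) this
            · rintro ⟨hiR, hil, himin⟩
              exact ⟨hiR, by omega, himin⟩
          rw [hsets]
          exact hcount
      · have hcond : PySem.List.pyGetD seen t true = false := by
          have : pvG true seen t ≠ true := hMk
          cases hb : pvG true seen t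
          · exact hb
          · exact absurd hb this
        have hstep : (if PySem.List.pyGetD (count, seen).2 t true = false then
              ((count, seen).1 + 1,
                dfsLoop (pvBuildAdj n es) (PySem.List.pySetD (count, seen).2 t true) [t])
            else (count, seen))
            = (count + 1, dfsLoop (pvBuildAdj n es) (PySem.List.pySetD seen t true) [t]) := by
          simp only
          rw [if_pos hcond]
        rw [hstep]
        have hlen0 : (PySem.List.pySetD seen t true).length = n.toNat := by
          rw [show PySem.List.pySetD seen t true = pvS seen t true from rfl, pvS_len, hlen]
        have hMk0 : ∀ j, pvInR n j →
            (Mk (PySem.List.pySetD seen t true) j ↔ (j = t ∨ Mk seen j)) := by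
          intro j hj
          have ht' : PySem.List.pySetD seen t true = pvS seen (pvNorm n t) true := by
            rw [hnormt]; rfl
          rw [Mk, ht', pvG_pvS_point true n seen hlen (pvNorm n t) j
            (by rw [hnormt]; exact htI) hj, hnormt]
          by_cases hjt : j = t
          · simp [hjt]
          · simp [hjt, Mk]
        have hconn := ufConn_gen n hn0 es (pvInit n) (pvInv_init n) hW
        have hAdjW : ∀ j y, pvInR n j → y ∈ pvG [] (pvBuildAdj n es) j → pvW n y :=
          fun j y hj hy => (adj_to_ERel n hn0 es hW j y hj hy).1
        have hGstep : ∀ j y, pvInR n j → y ∈ pvG [] (pvBuildAdj n es) j →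
            (Mk seen j ∨ pvRoot (ufFold es (pvInit n)) j = pvRoot (ufFold es (pvInit n)) t) →
            (Mk seen (pvNorm n y) ∨ pvRoot (ufFold es (pvInit n)) (pvNorm n y)
              = pvRoot (ufFold es (pvInit n)) t) := by
          intro j y hj hy hG
          obtain ⟨hyW, hE⟩ := adj_to_ERel n hn0 es hW j y hj hy
          have hyI := pvNorm_InR n y hyW
          rcases hG with hm | hr
          · exact Or.inl (hclosed j hj hm y hy)
          · right
            have : pvRoot (ufFold es (pvInit n)) j = pvRoot (ufFold es (pvInit n)) (pvNorm n y) :=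
              (hconn j (pvNorm n y) hj hyI).2 (Relation.EqvGen.rel _ _ (Or.inr hE))
            rw [← this]
            exact hr
        have hstk : ∀ t' ∈ [t], pvW n t' ∧ Mk (PySem.List.pySetD seen t true) (pvNorm n t') := by
          intro t' ht'
          simp only [List.mem_singleton] at ht'
          rw [ht']
          refine ⟨⟨by omega, hlt⟩, ?_⟩
          rw [hnormt]
          exact (hMk0 t htI).2 (Or.inl rfl)
        have hmG : ∀ j, pvInR n j → Mk (PySem.List.pySetD seen t true) j →
            (Mk seen j ∨ pvRoot (ufFold es (pvInit n)) j = pvRoot (ufFold es (pvInit n)) t) := by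
          intro j hj hm
          rcases (hMk0 j hj).1 hm with rfl | hm'
          · exact Or.inr rfl
          · exact Or.inl hm'
        have hfront : ∀ j, pvInR n j → Mk (PySem.List.pySetD seen t true) j →
            (∃ t' ∈ [t], pvNorm n t' = j) ∨
              ∀ y ∈ pvG [] (pvBuildAdj n es) j, Mk (PySem.List.pySetD seen t true) (pvNorm n y) := by
          intro j hj hm
          rcases (hMk0 j hj).1 hm with rfl | hm'
          · exact Or.inl ⟨j, by simp, hnormt⟩
          · right
            intro y hy
            have hyI := pvNorm_InR n y (hAdjW j y hj hy)
            exact (hMk0 _ hyI).2 (Or.inr (hclosed j hj hm' y hy))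
        obtain ⟨d1, d2, d3, d4⟩ := dfs_spec n hn0 (pvBuildAdj n es) (pvBuildAdj_len n es)
          (fun j => Mk seen j ∨ pvRoot (ufFold es (pvInit n)) j = pvRoot (ufFold es (pvInit n)) t)
          hAdjW hGstep (PySem.List.pySetD seen t true) [t] hlen0 hstk hmG hfront
        apply ih (t+1) (by omega) (by omega) (by omega) (count + 1)
          (dfsLoop (pvBuildAdj n es) (PySem.List.pySetD seen t true) [t]) d1 ?_ d4 ?_
        · intro j hj
          constructor
          · intro hm
            rcases d3 j hj hm with hmseen | hroot
            · obtain ⟨s0, a0, a1, a2⟩ := (hchar j hj).1 hmseen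
              exact ⟨s0, a0, by omega, a2⟩
            · exact ⟨t, ht0, by omega, hroot.symm⟩
          · rintro ⟨s0, h0, h1, h2⟩
            by_cases hs0 : s0 < t
            · exact d2 j hj ((hMk0 j hj).2 (Or.inr ((hchar j hj).2 ⟨s0, h0, hs0, h2⟩)))
            · have hs0t : s0 = t := by omega
              rw [hs0t] at h2
              have hEG : Relation.EqvGen (pvGen n (pvInit n) es) t j := (hconn t j htI hj).1 h2
              have hMkt : Mk (dfsLoop (pvBuildAdj n es) (PySem.List.pySetD seen t true) [t]) t :=
                d2 t htI ((hMk0 t htI).2 (Or.inl rfl))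
              rcases eqvGen_marked n hn0 es hW
                  (fun u => Mk (dfsLoop (pvBuildAdj n es) (PySem.List.pySetD seen t true) [t]) u)
                  (fun j y hj hy hP => d4 j hj hP y hy) t j hEG with heq | ⟨_, _, hiff⟩
              · rw [← heq]; exact hMkt
              · exact hiff.1 hMkt
        · have hmint : ∀ i' < t.toNat, pvRoot (ufFold es (pvInit n)) (i' : Int)
              ≠ pvRoot (ufFold es (pvInit n)) ((t.toNat : ℕ) : Int) := by
            intro i' hi' hcontra
            apply hMk
            apply (hchar t htI).2
            refine ⟨(i' : Int), by omega, by omega, ?_⟩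
            rw [hcontra, Int.toNat_of_nonneg ht0]
          have hins : pvMinima n (ufFold es (pvInit n)) (t+1)
              = insert t.toNat (pvMinima n (ufFold es (pvInit n)) t) := by
            unfold pvMinima
            ext i
            simp only [Finset.mem_insert, Finset.mem_filter, Finset.mem_range]
            constructor
            · rintro ⟨hiR, hil, himin⟩
              by_cases hit : (i : Int) = t
              · left; omega
              · right; exact ⟨hiR, by omega, himin⟩
            · rintro (rfl | ⟨hiR, hil, himin⟩)
              · refine ⟨by omega, by rw [Int.toNat_of_nonneg ht0]; omega, ?_⟩
                intro i' hi'
                exact hmint i' hi'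
              · exact ⟨hiR, by omega, himin⟩
          have hnotmem : t.toNat ∉ pvMinima n (ufFold es (pvInit n)) t := by
            unfold pvMinima
            simp only [Finset.mem_filter, Finset.mem_range]
            rintro ⟨_, hlt', _⟩
            rw [Int.toNat_of_nonneg ht0] at hlt'
            omega
          rw [hins, Finset.card_insert_of_notMem hnotmem]
          push_cast
          omega
    · have htn' : t = n := by omega
      subst htn'
      rw [PySem.List.pyRange_one_eq_nil le_rfl]
      simpa using hcount

theorem componentsLemma (n : Int) (hn0 : 0 ≤ n) (es : List (Int × Int)) (hW : hWEdges n es) :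
    pvComponents n es = (pvNR n (ufFold es (pvInit n)) : Int) := by
  have hred : pvComponents n es = ((PySem.List.pyRange 0 n 1).foldl
      (fun (p : Int × List Bool) s =>
        if PySem.List.pyGetD p.2 s true = false then
          (p.1 + 1, dfsLoop (pvBuildAdj n es) (PySem.List.pySetD p.2 s true) [s])
        else p) (0, List.replicate n.toNat false)).1 := rfl
  have h0char : ∀ j, pvInR n j → (Mk (List.replicate n.toNat false) j ↔ ∃ s0 : Int, 0 ≤ s0 ∧ s0 < 0 ∧
      pvRoot (ufFold es (pvInit n)) s0 = pvRoot (ufFold es (pvInit n)) j) := by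
    intro j hj
    constructor
    · intro hm
      exfalso
      have hj0 := hj.1
      have hj1 := hj.2
      rw [Mk, pvG_nonneg _ _ j hj0] at hm
      have hjlt : j.toNat < n.toNat := by omega
      rw [List.getD_eq_getElem?_getD, List.getElem?_replicate] at hm
      simp [hjlt] at hm
    · rintro ⟨s0, _, h, _⟩
      omega
  have h0closed : ∀ j, pvInR n j → Mk (List.replicate n.toNat false) j →
      ∀ y ∈ pvG [] (pvBuildAdj n es) j, Mk (List.replicate n.toNat false) (pvNorm n y) := by
    intro j hj hm
    exfalso
    rcases (h0char j hj).1 hm with ⟨s0, _, h, _⟩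
    omega
  have h0count : (0 : Int) = ((pvMinima n (ufFold es (pvInit n)) 0).card : Int) := by
    have : pvMinima n (ufFold es (pvInit n)) 0 = ∅ := by
      unfold pvMinima
      ext i
      simp only [Finset.mem_filter, Finset.mem_range, Finset.notMem_empty, iff_false]
      rintro ⟨_, h, _⟩
      omega
    rw [this]
    simp
  rw [hred, compLoop n hn0 es hW (n - 0).toNat 0 le_rfl hn0 (by omega) 0
    (List.replicate n.toNat false) (by simp) h0char h0closed h0count,
    minima_card_eq_NR n hn0 (ufFold es (pvInit n))
      (ufFold_inv n hn0 es (pvInit n) (pvInv_init n) hW)]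

-- ===== edge classification bridges =====

def mustF (e : Int × Int × Int × Int) : Option (Int × Int × Int) :=
  if e.2.2.2 = 1 then some (e.1, e.2.1, e.2.2.1) else none

def optF (e : Int × Int × Int × Int) : Option (Int × Int × Int) :=
  if e.2.2.2 = 1 then none else some (e.1, e.2.1, e.2.2.1)

def goodF (target : Int) (t : Int × Int × Int) : Option (Int × Int) :=
  if t.2.2 ≥ target then some (t.1, t.2.1) else none

def badF (target : Int) (t : Int × Int × Int) : Option (Int × Int) :=
  if t.2.2 ≥ target then none else if t.2.2 * 2 ≥ target then some (t.1, t.2.1) else none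

theorem moChar (edges : List (Int × Int × Int × Int))
    (acc : List (Int × Int × Int) × List (Int × Int × Int)) :
    edges.foldl (fun (acc : List (Int × Int × Int) × List (Int × Int × Int)) e =>
      if e.2.2.2 = 1 then (acc.1 ++ [(e.1, e.2.1, e.2.2.1)], acc.2)
      else (acc.1, acc.2 ++ [(e.1, e.2.1, e.2.2.1)])) acc =
    (acc.1 ++ edges.filterMap mustF, acc.2 ++ edges.filterMap optF) := by
  induction edges generalizing acc with
  | nil => simp
  | cons e es ih =>
    rw [List.foldl_cons, ih]
    by_cases h : e.2.2.2 = 1 <;> simp [mustF, optF, h]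

theorem gbChar (target : Int) (ts : List (Int × Int × Int))
    (acc : List (Int × Int) × List (Int × Int)) :
    ts.foldl (fun (acc : List (Int × Int) × List (Int × Int)) e =>
      if e.2.2 ≥ target then (acc.1 ++ [(e.1, e.2.1)], acc.2)
      else if e.2.2 * 2 ≥ target then (acc.1, acc.2 ++ [(e.1, e.2.1)])
      else acc) acc =
    (acc.1 ++ ts.filterMap (goodF target), acc.2 ++ ts.filterMap (badF target)) := by
  induction ts generalizing acc with
  | nil => simp
  | cons e es ih =>
    rw [List.foldl_cons, ih]
    by_cases h : e.2.2 ≥ target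
    · simp [goodF, badF, h]
    · by_cases h2 : e.2.2 * 2 ≥ target <;> simp [goodF, badF, h, h2]

def bMustF (e : Int × Int × Int × Int) : Option (Int × Int) :=
  if e.2.2.2 = 1 then some (e.1, e.2.1) else none

def bGoodF (target : Int) (e : Int × Int × Int × Int) : Option (Int × Int) :=
  if e.2.2.2 = 1 then none else if e.2.2.1 ≥ target then some (e.1, e.2.1) else none

def bBadF (target : Int) (e : Int × Int × Int × Int) : Option (Int × Int) :=
  if e.2.2.2 = 1 then none
  else if e.2.2.1 ≥ target then none
  else if e.2.2.1 * 2 ≥ target then some (e.1, e.2.1) else none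

def weakP (target : Int) (e : Int × Int × Int × Int) : Bool :=
  e.2.2.2 = 1 ∧ e.2.2.1 < target

theorem mustBridge (edges : List (Int × Int × Int × Int)) :
    (edges.filterMap mustF).map (fun t => (t.1, t.2.1)) = edges.filterMap bMustF := by
  rw [List.map_filterMap]
  apply List.filterMap_congr
  intro e _
  by_cases h : e.2.2.2 = 1 <;> simp [mustF, bMustF, h]

theorem goodBridge (target : Int) (edges : List (Int × Int × Int × Int)) :
    (edges.filterMap optF).filterMap (goodF target) = edges.filterMap (bGoodF target) := by
  rw [List.filterMap_filterMap]
  apply List.filterMap_congr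
  intro e _
  by_cases h : e.2.2.2 = 1
  · simp [optF, bGoodF, h]
  · by_cases hg : e.2.2.1 ≥ target <;> simp [optF, goodF, bGoodF, h, hg]

theorem badBridge (target : Int) (edges : List (Int × Int × Int × Int)) :
    (edges.filterMap optF).filterMap (badF target) = edges.filterMap (bBadF target) := by
  rw [List.filterMap_filterMap]
  apply List.filterMap_congr
  intro e _
  by_cases h : e.2.2.2 = 1
  · simp [optF, bBadF, h]
  · by_cases hg : e.2.2.1 ≥ target
    · simp [optF, badF, bBadF, h, hg]
    · by_cases hb : e.2.2.1 * 2 ≥ target <;> simp [optF, badF, bBadF, h, hg, hb]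

theorem weakBridge (target : Int) (edges : List (Int × Int × Int × Int)) :
    (edges.filterMap mustF).any (fun e => decide (e.2.2 < target)) =
      edges.any (weakP target) := by
  induction edges with
  | nil => rfl
  | cons e es ih =>
    by_cases h : e.2.2.2 = 1
    · have hm : mustF e = some (e.1, e.2.1, e.2.2.1) := by simp [mustF, h]
      rw [List.filterMap_cons, hm]
      simp only [List.any_cons, ih]
      have hw : weakP target e = decide (e.2.2.1 < target) := by simp [weakP, h]
      rw [hw]
    · have hm : mustF e = none := by simp [mustF, h]
      rw [List.filterMap_cons, hm]
      simp only [List.any_cons, ih]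
      have hw : weakP target e = false := by simp [weakP, h]
      rw [hw, Bool.false_or]

theorem classifyChar (target : Int) (edges : List (Int × Int × Int × Int)) :
    pvClassify target edges =
      (if edges.any (weakP target) then none
       else some (edges.filterMap bMustF, edges.filterMap (bGoodF target),
                  edges.filterMap (bBadF target))) := by
  induction edges with
  | nil => simp [pvClassify]
  | cons e es ih =>
    by_cases h : e.2.2.2 = 1
    · by_cases hw : e.2.2.1 < target
      · simp [pvClassify, h, hw, weakP]
      · simp only [pvClassify, if_pos h, if_neg hw, ih]
        by_cases ha : es.any (weakP target)
        · simp [ha, weakP, h, hw]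
        · simp [ha, weakP, h, hw, bMustF, bGoodF, bBadF]
    · by_cases hg : e.2.2.1 ≥ target
      · simp only [pvClassify, if_neg h, if_pos hg, ih]
        by_cases ha : es.any (weakP target)
        · simp [ha, weakP, h]
        · simp [ha, weakP, h, bMustF, bGoodF, bBadF, hg]
      · by_cases hb : e.2.2.1 * 2 ≥ target
        · simp only [pvClassify, if_neg h, if_neg hg, if_pos hb, ih]
          by_cases ha : es.any (weakP target)
          · simp [ha, weakP, h]
          · simp [ha, weakP, h, bMustF, bGoodF, bBadF, hg, hb]
        · simp only [pvClassify, if_neg h, if_neg hg, if_neg hb, ih]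
          by_cases ha : es.any (weakP target)
          · simp [ha, weakP, h]
          · simp [ha, weakP, h, bMustF, bGoodF, bBadF, hg, hb]

theorem main_equiv (n : Int) (edges : List (Int × Int × Int × Int)) (k : Int) (target : Int)
    (hpre : Pre_canAchieve n edges k target) :
    canAchieve n edges k target = canAchieve_alt n edges k target := by
  unfold canAchieve canAchieve_alt
  simp only [moChar, gbChar, List.nil_append]
  rw [weakBridge]
  by_cases hweak : edges.any (weakP target) = true
  · have hcl : pvClassify target edges = none := by
      rw [classifyChar, if_pos hweak]
    rw [hcl]
    simp [hweak]
  · rw [Bool.not_eq_true] at hweak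
    have hcl : pvClassify target edges = some (edges.filterMap bMustF,
        edges.filterMap (bGoodF target), edges.filterMap (bBadF target)) := by
      rw [classifyChar, hweak]
      simp
    have hedge : ∀ e ∈ edges,
        (e.2.2.2 = 1 ∨ e.2.2.1 ≥ target ∨ e.2.2.1 * 2 ≥ target) →
        -n ≤ e.1 ∧ e.1 < n ∧ -n ≤ e.2.1 ∧ e.2.1 < n := by
      rcases hpre with ⟨e, he, hm, hs⟩ | h
      · exfalso
        have : edges.any (weakP target) = true :=
          List.any_eq_true.2 ⟨e, he, by simp [weakP, hm, hs]⟩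
        rw [hweak] at this
        exact Bool.false_eq_true.mp this
      · exact h
    by_cases husable : ∃ e ∈ edges, (e.2.2.2 = 1 ∨ e.2.2.1 ≥ target ∨ e.2.2.1 * 2 ≥ target)
    case neg =>
      -- no classified edge at all: every list is empty, both sides reduce to `n == 1` / False
      push Not at husable
      rw [hweak, hcl]
      simp only [Bool.false_eq_true, if_false]
      have hm1 : edges.filterMap mustF = [] := by
        rw [List.filterMap_eq_nil_iff]
        intro e he
        have hne : ¬ e.2.2.2 = 1 := (husable e he).1
        simp [mustF, hne]
      have hb1 : edges.filterMap bMustF = [] := by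
        rw [List.filterMap_eq_nil_iff]
        intro e he
        have hne : ¬ e.2.2.2 = 1 := (husable e he).1
        simp [bMustF, hne]
      have hg1 : edges.filterMap (bGoodF target) = [] := by
        rw [List.filterMap_eq_nil_iff]
        intro e he
        have hne : ¬ e.2.2.2 = 1 := (husable e he).1
        have hng : ¬ e.2.2.1 ≥ target := by have := (husable e he).2.1; omega
        simp [bGoodF, hne, hng]
      have hbd1 : edges.filterMap (bBadF target) = [] := by
        rw [List.filterMap_eq_nil_iff]
        intro e he
        have hne : ¬ e.2.2.2 = 1 := (husable e he).1
        have hng : ¬ e.2.2.1 ≥ target := by have := (husable e he).2.1; omega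
        have hnb : ¬ e.2.2.1 * 2 ≥ target := by have := (husable e he).2.2; omega
        simp [bBadF, hne, hng, hnb]
      simp only [goodBridge, badBridge, hm1, hb1, hg1, hbd1, List.foldl_nil, List.append_nil,
        List.length_nil, Nat.cast_zero]
      by_cases hsign : 0 ≤ n
      · have hWnil : hWEdges n ([] : List (Int × Int)) := by intro e he; simp at he
        have hc : pvComponents n ([] : List (Int × Int)) = n := by
          rw [componentsLemma n hsign [] hWnil]
          show (pvNR n (pvInit n) : Int) = n
          rw [pvNR_init]
          omega
        rw [hc, if_neg (by omega : ¬ (n - n ≠ (0:Int)))]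
        by_cases h1 : n = 1
        · simp [h1]
        · have hb : (n == 1) = false := by simp [h1]
          simp [hb]
      · have hrn : PySem.List.pyRange 0 n (1:Int) = [] :=
          PySem.List.pyRange_one_eq_nil (by omega)
        have hc : pvComponents n ([] : List (Int × Int)) = 0 := by
          have hred0 : pvComponents n ([] : List (Int × Int))
              = ((PySem.List.pyRange 0 n 1).foldl
                (fun (p : Int × List Bool) s =>
                  if PySem.List.pyGetD p.2 s true = false then
                    (p.1 + 1, dfsLoop (pvBuildAdj n []) (PySem.List.pySetD p.2 s true) [s])
                  else p) (0, List.replicate n.toNat false)).1 := rfl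
          rw [hred0, hrn]
          rfl
        rw [hc, if_pos (by omega : n - 0 ≠ (0:Int))]
        have hb : (n == 1) = false := by
          have : n ≠ 1 := by omega
          simp [this]
        rw [hb]
    case pos =>
    obtain ⟨e0, he0, hr0⟩ := husable
    have hn0 : 0 ≤ n := by
      have := hedge e0 he0 hr0
      omega
    have hinTri : ∀ (f : (Int × Int × Int × Int) → Option (Int × Int × Int)),
        (∀ e, ∀ t, f e = some t →
          (t.1 = e.1 ∧ t.2.1 = e.2.1) ∧
            (e.2.2.2 = 1 ∨ e.2.2.1 ≥ target ∨ e.2.2.1 * 2 ≥ target)) →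
        ∀ t ∈ edges.filterMap f, pvW n t.1 ∧ pvW n t.2.1 := by
      intro f hf t ht
      obtain ⟨e, he, hfe⟩ := List.mem_filterMap.1 ht
      obtain ⟨⟨h1, h2⟩, hrel⟩ := hf e t hfe
      obtain ⟨a1, a2, a3, a4⟩ := hedge e he hrel
      rw [h1, h2]
      exact ⟨⟨a1, a2⟩, ⟨a3, a4⟩⟩
    have hinPair : ∀ (f : (Int × Int × Int × Int) → Option (Int × Int)),
        (∀ e, ∀ t, f e = some t →
          (t.1 = e.1 ∧ t.2 = e.2.1) ∧
            (e.2.2.2 = 1 ∨ e.2.2.1 ≥ target ∨ e.2.2.1 * 2 ≥ target)) →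
        hWEdges n (edges.filterMap f) := by
      intro f hf t ht
      obtain ⟨e, he, hfe⟩ := List.mem_filterMap.1 ht
      obtain ⟨⟨h1, h2⟩, hrel⟩ := hf e t hfe
      obtain ⟨a1, a2, a3, a4⟩ := hedge e he hrel
      rw [h1, h2]
      exact ⟨⟨a1, a2⟩, ⟨a3, a4⟩⟩
    rw [hweak, hcl]
    simp only [Bool.false_eq_true, if_false]
    rw [show (fun (st : Option (List Int × Int)) (e : Int × Int × Int) =>
          match st with
          | none => none
          | some (p, comp) =>
            let r := unionA p e.1 e.2.1
            if r.2 then some (r.1, comp - 1) else none) = stepMA from rfl]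
    rw [show (fun (st : List Int × Int) (e : Int × Int) =>
          if st.2 = 1 then st
          else
            let r := unionA st.1 e.1 e.2
            (r.1, if r.2 then st.2 - 1 else st.2)) = stepGA from rfl]
    rw [show (fun (st : List Int × Int × Int) (e : Int × Int) =>
          if st.2.1 = 1 then st
          else if st.2.2 ≥ k then st
          else
            let r := unionA st.1 e.1 e.2
            if r.2 then (r.1, st.2.1 - 1, st.2.2 + 1) else (r.1, st.2.1, st.2.2)) = stepBA k from rfl]
    rw [show PySem.List.pyRange 0 n 1 = pvInit n from rfl]
    -- in-range facts for the classified edge lists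
    have hWmustT := hinTri mustF (by
      intro e t hft
      unfold mustF at hft
      by_cases h : e.2.2.2 = 1
      · rw [if_pos h] at hft
        cases hft
        exact ⟨⟨rfl, rfl⟩, Or.inl h⟩
      · rw [if_neg h] at hft; cases hft)
    have hWmust : hWEdges n (edges.filterMap bMustF) := hinPair bMustF (by
      intro e t hft
      unfold bMustF at hft
      by_cases h : e.2.2.2 = 1
      · rw [if_pos h] at hft; cases hft; exact ⟨⟨rfl, rfl⟩, Or.inl h⟩
      · rw [if_neg h] at hft; cases hft)
    have hWgood : hWEdges n (edges.filterMap (bGoodF target)) := hinPair _ (by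
      intro e t hft
      unfold bGoodF at hft
      by_cases h : e.2.2.2 = 1
      · rw [if_pos h] at hft; cases hft
      · rw [if_neg h] at hft
        by_cases hg : e.2.2.1 ≥ target
        · rw [if_pos hg] at hft; cases hft; exact ⟨⟨rfl, rfl⟩, Or.inr (Or.inl hg)⟩
        · rw [if_neg hg] at hft; cases hft)
    have hWbad : hWEdges n (edges.filterMap (bBadF target)) := hinPair _ (by
      intro e t hft
      unfold bBadF at hft
      by_cases h : e.2.2.2 = 1
      · rw [if_pos h] at hft; cases hft
      · rw [if_neg h] at hft
        by_cases hg : e.2.2.1 ≥ target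
        · rw [if_pos hg] at hft; cases hft
        · rw [if_neg hg] at hft
          by_cases hb : e.2.2.1 * 2 ≥ target
          · rw [if_pos hb] at hft; cases hft; exact ⟨⟨rfl, rfl⟩, Or.inr (Or.inr hb)⟩
          · rw [if_neg hb] at hft; cases hft)
    -- must stage
    have hc0 : (n : Int) = (pvNR n (pvInit n) : Int) := by rw [pvNR_init]; omega
    obtain ⟨hbound, hfold⟩ := mustLoop2 n hn0 (edges.filterMap mustF) (pvInit n) n
      (pvInv_init n) (fun e he => hWmustT e he) hc0
    rw [mustBridge] at hfold hbound
    have hlenmust : ((edges.filterMap mustF).length : Int)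
        = ((edges.filterMap bMustF).length : Int) := by
      rw [← mustBridge, List.length_map]
    have hInvM0 : pvInv n (ufFold (edges.filterMap bMustF) (pvInit n)) :=
      ufFold_inv n hn0 _ (pvInit n) (pvInv_init n) hWmust
    have hcomp0 : pvComponents n (edges.filterMap bMustF)
        = (pvNR n (ufFold (edges.filterMap bMustF) (pvInit n)) : Int) :=
      componentsLemma n hn0 _ hWmust
    rw [hfold, hcomp0]
    by_cases hcond : (pvNR n (ufFold (edges.filterMap bMustF) (pvInit n)) : Int)
        = n - (edges.filterMap mustF).length
    · rw [if_pos hcond]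
      have hguard : ¬ (n - (pvNR n (ufFold (edges.filterMap bMustF) (pvInit n)) : Int)
          ≠ ((edges.filterMap bMustF).length : Int)) := by omega
      rw [if_neg hguard]
      simp only [goodBridge, badBridge]
      -- good stage
      have hWmg : hWEdges n (edges.filterMap bMustF ++ edges.filterMap (bGoodF target)) := by
        intro e he
        rcases List.mem_append.1 he with h | h
        · exact hWmust e h
        · exact hWgood e h
      have hWmgb : hWEdges n ((edges.filterMap bMustF ++ edges.filterMap (bGoodF target))
          ++ edges.filterMap (bBadF target)) := by
        intro e he
        rcases List.mem_append.1 he with h | h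
        · exact hWmg e h
        · exact hWbad e h
      have hRel0 : pvRel n (ufFold (edges.filterMap bMustF) (pvInit n))
          (ufFold (edges.filterMap bMustF) (pvInit n)) := ⟨hInvM0, hInvM0, fun _ _ => rfl⟩
      obtain ⟨hg2, hgRel, hgNR⟩ := goodLoop2 n hn0 (edges.filterMap (bGoodF target))
        (ufFold (edges.filterMap bMustF) (pvInit n)) (ufFold (edges.filterMap bMustF) (pvInit n))
        (n - (edges.filterMap mustF).length) hRel0 hWgood hcond.symm
      obtain ⟨hu1, hu2⟩ := stepU_run n hn0 (edges.filterMap (bGoodF target))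
        (ufFold (edges.filterMap bMustF) (pvInit n)) (n - (edges.filterMap mustF).length)
        hInvM0 hWgood hcond.symm
      have hcomp1 : pvComponents n (edges.filterMap bMustF ++ edges.filterMap (bGoodF target))
          = (pvNR n (ufFold (edges.filterMap (bGoodF target))
              (ufFold (edges.filterMap bMustF) (pvInit n))) : Int) := by
        rw [componentsLemma n hn0 _ hWmg, ufFold_append]
      have hcomp2 : pvComponents n ((edges.filterMap bMustF ++ edges.filterMap (bGoodF target))
            ++ edges.filterMap (bBadF target))
          = (pvNR n (ufFold (edges.filterMap (bBadF target))
              (ufFold (edges.filterMap (bGoodF target))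
                (ufFold (edges.filterMap bMustF) (pvInit n)))) : Int) := by
        rw [componentsLemma n hn0 _ hWmgb, ufFold_append, ufFold_append]
      set a2 := (edges.filterMap (bGoodF target)).foldl stepGA
        (ufFold (edges.filterMap bMustF) (pvInit n), n - (edges.filterMap mustF).length) with ha2
      set b2 := (edges.filterMap (bGoodF target)).foldl stepU
        (ufFold (edges.filterMap bMustF) (pvInit n), n - (edges.filterMap mustF).length) with hb2
      -- bad stage
      have hbad := badLoop2 n k hn0 (edges.filterMap (bBadF target)) a2.1 b2.1 a2.2 0
        hgRel hWbad hgNR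
      have hInvb2 : pvInv n b2.1 := by
        rw [hu1]
        exact ufFold_inv n hn0 _ _ hInvM0 hWgood
      have hcb2 : b2.2 = (pvNR n b2.1 : Int) := by
        rw [hu2, hu1]
      obtain ⟨hv1, hv2⟩ := stepU_run n hn0 (edges.filterMap (bBadF target)) b2.1 b2.2
        hInvb2 hWbad hcb2
      have hpair : (b2.1, a2.2) = b2 := by rw [hg2]
      rw [hpair] at hbad
      have hb2eta : (b2.1, b2.2) = b2 := rfl
      rw [hb2eta] at hv1 hv2
      set a3 := (edges.filterMap (bBadF target)).foldl (stepBA k) (a2.1, a2.2, 0) with ha3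
      set b3 := (edges.filterMap (bBadF target)).foldl stepU b2 with hb3
      rw [hg2] at hbad
      rcases hbad with ⟨hfwd, hbwd⟩
      -- identify B's component counts
      rw [hcomp1, hcomp2]
      have hc1v : (pvNR n (ufFold (edges.filterMap (bGoodF target))
          (ufFold (edges.filterMap bMustF) (pvInit n))) : Int) = b2.2 := by
        simp only [hu2]
      have hc2v : (pvNR n (ufFold (edges.filterMap (bBadF target))
          (ufFold (edges.filterMap (bGoodF target))
            (ufFold (edges.filterMap bMustF) (pvInit n)))) : Int) = b3.2 := by
        rw [hv2, hu1]
      rw [hc1v, hc2v]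
      -- final boolean algebra (A's capped loop vs the closed test)
      cases hA3 : decide (a3.2.1 = 1) with
      | true =>
        simp only [decide_eq_true_eq] at hA3
        obtain ⟨hcb, hor⟩ := hfwd hA3
        have hx1 : (a3.2.1 == 1) = true := by simpa [beq_iff_eq] using hA3
        rw [hx1, hcb]
        rcases hor with h | h
        · simp [h]
        · simp
          omega
      | false =>
        simp only [decide_eq_false_iff_not] at hA3
        have hbeq : (a3.2.1 == 1) = false := by simpa [beq_iff_eq] using hA3
        rw [hbeq]
        by_cases hcb : b3.2 = 1
        · by_cases hone : b2.2 = 1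
          · exact absurd (hbwd ⟨hcb, Or.inl hone⟩) hA3
          · by_cases hk : k ≥ b2.2 - 1
            · exact absurd (hbwd ⟨hcb, Or.inr (by omega)⟩) hA3
            · have h1 : (b2.2 == 1) = false := by simpa [beq_iff_eq] using hone
              simp [h1, hcb]
              omega
        · have : (b3.2 == 1) = false := by simpa [beq_iff_eq] using hcb
          simp [this]
    · rw [if_neg hcond]
      have hguard : n - (pvNR n (ufFold (edges.filterMap bMustF) (pvInit n)) : Int)
          ≠ ((edges.filterMap bMustF).length : Int) := by omega
      rw [if_pos hguard]

-- ===== VERDICT (by name: the statement is the Claim_ definition above) =====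
theorem canAchieve_spec : Claim_equal_canAchieve := by
  intro n edges k target _ hpre
  unfold Spec_canAchieve
  exact main_equiv n edges k target hpre
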